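-- pv_equiv track=rewrite | github.com/whglamrock/leetcode_series | leetcode1258 Synonymous Sentences.py | generateConnectedSynonyms
-- ===== SOURCE A (Python) =====
-- from typing import List, Dict
--
-- def generateConnectedSynonyms(similarWords: Dict[str, set]) -> Dict[str, set]:
--     connectedSynonyms = {}
--     visited = set()
--
--     for word in similarWords:
--         if word in visited:
--             continue
--
--         connectedWords = set()
--         todo = {word}
--         while todo:
--             nextTodo = set()
--             for currWord in todo:
--                 visited.add(currWord)
--                 connectedWords.add(currWord)
--                 if currWord not in similarWords:
--                     continue
--                 for nextWord in similarWords[currWord]: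
--                     if nextWord not in visited:
--                         nextTodo.add(nextWord)
--             todo = nextTodo
--
--         for connectedWord in connectedWords:
--             connectedSynonyms[connectedWord] = connectedWords
--
--     return connectedSynonyms
-- ===== SOURCE B (Python) =====
-- def generateConnectedSynonyms(similarWords):
--     # Depth-first search with an explicit stack: one flat while loop per component
--     # (pop a node; skip it if already visited, else mark it, collect it, and push all
--     # its forward neighbours), instead of A's layered frontier-set BFS.
--     connectedSynonyms = {}
--     visited = set()
--
--     for word in similarWords:
--         if word in visited:
--             continue
--
--         connectedWords = set()
--         stack = [word]
--         while stack:
--             node = stack.pop()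
--             if node in visited:
--                 continue
--             visited.add(node)
--             connectedWords.add(node)
--             stack.extend(similarWords.get(node, ()))
--
--         for connectedWord in connectedWords:
--             connectedSynonyms[connectedWord] = connectedWords
--
--     return connectedSynonyms
-- ===== Notes on version B (the rewrite author's own statement) =====
-- stated objective: alternative
-- what changed: A's layered breadth-first flood fill (rebuilding a nextTodo frontier set per layer inside a while-over-layers loop) is replaced by an explicit-stack depth-first search: one flat while loop per component that pops a node, skips it if visited, otherwise marks and collects it and pushes all its forward neighbours; correct because the collected component is exactly directed reachability avoiding the previously-visited set, which is traversal-order independent.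
import Mathlib
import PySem

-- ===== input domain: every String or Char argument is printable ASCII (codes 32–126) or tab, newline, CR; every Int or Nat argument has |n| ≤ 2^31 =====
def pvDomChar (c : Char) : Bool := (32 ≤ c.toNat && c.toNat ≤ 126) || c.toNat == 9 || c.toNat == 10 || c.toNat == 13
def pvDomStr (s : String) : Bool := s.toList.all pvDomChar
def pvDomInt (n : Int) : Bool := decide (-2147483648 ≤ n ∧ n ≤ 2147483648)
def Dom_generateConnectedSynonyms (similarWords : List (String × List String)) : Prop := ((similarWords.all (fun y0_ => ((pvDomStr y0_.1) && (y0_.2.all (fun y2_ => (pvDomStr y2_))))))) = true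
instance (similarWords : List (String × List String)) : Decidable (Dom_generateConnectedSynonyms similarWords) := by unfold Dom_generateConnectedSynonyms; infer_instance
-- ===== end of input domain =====

-- B replaces A's layered frontier-set BFS by an explicit-stack depth-first search
-- (one flat while loop per component, mark at pop); return value only, no argument is
-- mutated.  Python's iteration order over the set `connectedWords` (hash order) is not
-- modelled by PySem; since the returned dict is compared by key set and set values,
-- BOTH ports determinize that iteration as sorted order.

-- ===== PORT A =====

-- fuel bound for A's while-loop (totality guard only; proved sufficient below)
def pvFuel (d : PySem.Dict String (List String)) : Nat :=
  (d.keys ++ d.values.flatMap (fun v => v)).length + 2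

-- one `for currWord in todo` step of A's inner layer loop
def pvLayerStepA (d : PySem.Dict String (List String))
    (st : List String × List String × List String) (curr : String) :
    List String × List String × List String :=
  let vis := PySem.Set.add st.1 curr
  let conn := PySem.Set.add st.2.1 curr
  match d.get? curr with
  | none => (vis, conn, st.2.2)                -- `if currWord not in similarWords: continue`
  | some nbrs =>
      (vis, conn, nbrs.foldl
        (fun nx nw => if PySem.Set.contains vis nw then nx else PySem.Set.add nx nw) st.2.2)

-- A's `while todo:` loop (state: visited, connectedWords, todo)
def pvWhileA (d : PySem.Dict String (List String)) :
    Nat → List String → List String → List String → List String × List String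
  | 0, vis, conn, _ => (vis, conn)
  | fuel+1, vis, conn, todo =>
      if todo.isEmpty then (vis, conn)
      else
        let st := todo.foldl (pvLayerStepA d) (vis, conn, PySem.Set.empty)
        pvWhileA d fuel st.1 st.2.1 st.2.2

def generateConnectedSynonyms (similarWords : List (String × List String)) : List (String × List String) :=
  let d := PySem.Dict.ofList similarWords
  let st := d.keys.foldl
    (fun (st : PySem.Dict String (List String) × List String) word =>
      if PySem.Set.contains st.2 word then st
      else
        let r := pvWhileA d (pvFuel d) st.2 PySem.Set.empty (PySem.Set.add PySem.Set.empty word)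
        -- `for connectedWord in connectedWords:` — set iteration, determinized sorted
        let s := PySem.List.sorted r.2 (fun x => x) false
        (s.foldl (fun res cw => res.insert cw s) st.1, r.1))
    (PySem.Dict.empty, PySem.Set.empty)
  st.1.items

-- ===== PORT B =====

-- the word universe (keys and all neighbour words); used only for fuel bounds
def pvW (d : PySem.Dict String (List String)) : List String :=
  PySem.Set.ofList (d.keys ++ d.values.flatMap (fun v => v))

-- fuel bound for B's DFS stack loop (totality guard only; proved sufficient below)
def pvFuelB (d : PySem.Dict String (List String)) : Nat :=
  (pvW d).length * (d.values.flatMap (fun v => v)).length + (pvW d).length + 2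

-- B's `while stack:` DFS loop (state: visited, connectedWords, stack).  The list head
-- is the top of the stack, so Python's `stack.extend(nbrs)` followed by `stack.pop()`
-- from the end is modeled by prepending `nbrs.reverse`.
def pvWhileD (d : PySem.Dict String (List String)) :
    Nat → List String → List String → List String → List String × List String
  | 0, vis, conn, _ => (vis, conn)
  | fuel+1, vis, conn, stack =>
      match stack with
      | [] => (vis, conn)
      | node :: rest =>
          if PySem.Set.contains vis node then pvWhileD d fuel vis conn rest
          else
            pvWhileD d fuel (PySem.Set.add vis node) (PySem.Set.add conn node)
              ((d.getD node []).reverse ++ rest)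

def generateConnectedSynonyms_alt (similarWords : List (String × List String)) : List (String × List String) :=
  let d := PySem.Dict.ofList similarWords
  let st := d.keys.foldl
    (fun (st : PySem.Dict String (List String) × List String) word =>
      if PySem.Set.contains st.2 word then st
      else
        let r := pvWhileD d (pvFuelB d) st.2 PySem.Set.empty [word]
        -- `for connectedWord in connectedWords:` — set iteration, determinized sorted
        let s := PySem.List.sorted r.2 (fun x => x) false
        (s.foldl (fun res cw => res.insert cw s) st.1, r.1))
    (PySem.Dict.empty, PySem.Set.empty)
  st.1.items

-- ===== PRECONDITION & SPEC =====
def Spec_generateConnectedSynonyms (similarWords : List (String × List String)) (out : List (String × List String)) : Prop := out = generateConnectedSynonyms_alt similarWords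
instance (similarWords : List (String × List String)) (out : List (String × List String)) : Decidable (Spec_generateConnectedSynonyms similarWords out) := by unfold Spec_generateConnectedSynonyms; infer_instance

-- ===== CLAIM (what is proved, stated in full; the proofs are below) =====
def Claim_equal_generateConnectedSynonyms : Prop := ∀ (similarWords : List (String × List String)), Dom_generateConnectedSynonyms similarWords → Spec_generateConnectedSynonyms similarWords (generateConnectedSynonyms similarWords)

-- ===== LEMMAS AND PROOFS =====

-- B's `for curr in queue` over the growing queue: state (visited, processed prefix, pending rest, seen)
def pvQueue (d : PySem.Dict String (List String)) :
    Nat → List String → List String → List String → List String → List String × List String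
  | 0, vis, order, _, _ => (vis, order)
  | fuel+1, vis, order, pending, seen =>
      match pending with
      | [] => (vis, order)
      | curr :: rest =>
          let vis := PySem.Set.add vis curr
          let order := order ++ [curr]
          let ps := (d.getD curr []).foldl
            (fun (ps : List String × List String) nw =>
              if PySem.Set.contains vis nw || PySem.Set.contains ps.2 nw then ps
              else (ps.1 ++ [nw], PySem.Set.add ps.2 nw)) (rest, seen)
          pvQueue d fuel vis order ps.1 ps.2

-- ---------- proof-side definitions ----------

def pvNbr (d : PySem.Dict String (List String)) (x : String) : List String := (d.get? x).getD []

def pvStepB (vis : List String) (ps : List String × List String) (nw : String) :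
    List String × List String :=
  if PySem.Set.contains vis nw || PySem.Set.contains ps.2 nw then ps
  else (ps.1 ++ [nw], PySem.Set.add ps.2 nw)

def pvDisc (d : PySem.Dict String (List String)) (vis : List String) :
    List String → List String → List String × List String
  | [], seen => ([], seen)
  | x :: xs, seen =>
      let p := (pvNbr d x).foldl (pvStepB vis) ([], seen)
      let r := pvDisc d vis xs p.2
      (p.1 ++ r.1, r.2)

-- ---------- basic lemmas ----------

lemma pv_contains_eq (s : List String) (x : String) :
    PySem.Set.contains s x = decide (x ∈ s) := by
  simp [PySem.Set.contains_eq_listContains]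

lemma pv_layer_step_eq (d : PySem.Dict String (List String))
    (st : List String × List String × List String) (curr : String) :
    pvLayerStepA d st curr =
      (PySem.Set.add st.1 curr, PySem.Set.add st.2.1 curr,
       (pvNbr d curr).foldl
        (fun nx nw => if PySem.Set.contains (PySem.Set.add st.1 curr) nw then nx
                      else PySem.Set.add nx nw) st.2.2) := by
  unfold pvLayerStepA pvNbr
  cases d.get? curr <;> simp

lemma pv_nbr_sub_W (d : PySem.Dict String (List String)) (x y : String)
    (h : y ∈ pvNbr d x) : y ∈ pvW d := by
  unfold pvNbr at h
  cases hg : d.get? x with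
  | none => rw [hg] at h; simp at h
  | some v =>
      rw [hg] at h
      simp at h
      have hv : v ∈ d.values := by
        have h2 := PySem.Dict.mem_items_of_get?_eq_some (d := d) hg
        have : v = (x, v).2 := rfl
        rw [this]; exact List.mem_map_of_mem h2
      unfold pvW
      rw [PySem.Set.mem_ofList]
      exact List.mem_append_right _ (List.mem_flatMap.2 ⟨v, hv, h⟩)

lemma pv_keys_sub_W (d : PySem.Dict String (List String)) (w : String)
    (h : w ∈ d.keys) : w ∈ pvW d := by
  unfold pvW
  rw [PySem.Set.mem_ofList]
  exact List.mem_append_left _ h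

lemma pv_fuel_ge (d : PySem.Dict String (List String)) :
    (pvW d).length + 2 ≤ pvFuel d := by
  unfold pvW pvFuel
  have := PySem.Set.length_ofList_le (xs := d.keys ++ d.values.flatMap (fun v => v))
  omega

lemma pv_len_le_W (d : PySem.Dict String (List String)) (l : List String)
    (hnd : l.Nodup) (hsub : ∀ y ∈ l, y ∈ pvW d) : l.length ≤ (pvW d).length :=
  (hnd.subperm (fun _ hy => hsub _ hy)).length_le

-- ---------- B-side inner fold lemmas ----------

lemma pv_foldB_prefix (vis : List String) (l : List String) :
    ∀ (q s : List String),
      l.foldl (pvStepB vis) (q, s) =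
        (q ++ (l.foldl (pvStepB vis) ([], s)).1, (l.foldl (pvStepB vis) ([], s)).2) := by
  induction l with
  | nil => intro q s; simp
  | cons y ys ih =>
      intro q s
      by_cases hc : (PySem.Set.contains vis y || PySem.Set.contains s y) = true
      · simp only [List.foldl_cons, pvStepB, hc, if_pos rfl, if_true]
        exact ih q s
      · simp only [List.foldl_cons, pvStepB, hc, Bool.false_eq_true, if_false]
        rw [ih (q ++ [y])]
        simp only [List.nil_append]
        rw [ih [y]]
        simp

lemma pv_foldB_char (vis : List String) (l : List String) :
    ∀ (s : List String),
      (∀ y, y ∈ (l.foldl (pvStepB vis) ([], s)).2 ↔ y ∈ s ∨ y ∈ (l.foldl (pvStepB vis) ([], s)).1) ∧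
      (l.foldl (pvStepB vis) ([], s)).1.Nodup ∧
      (∀ y ∈ (l.foldl (pvStepB vis) ([], s)).1, y ∉ vis ∧ y ∉ s ∧ y ∈ l) := by
  induction l with
  | nil => intro s; simp
  | cons z zs ih =>
      intro s
      by_cases hv : z ∈ vis
      · have hc : (PySem.Set.contains vis z || PySem.Set.contains s z) = true := by
          simp [pv_contains_eq, hv]
        simp only [List.foldl_cons, pvStepB, hc, if_true]
        obtain ⟨m, nd, pr⟩ := ih s
        exact ⟨m, nd, fun y hy => ⟨(pr y hy).1, (pr y hy).2.1, List.mem_cons_of_mem _ (pr y hy).2.2⟩⟩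
      · by_cases hs : z ∈ s
        · have hc : (PySem.Set.contains vis z || PySem.Set.contains s z) = true := by
            simp [pv_contains_eq, hs]
          simp only [List.foldl_cons, pvStepB, hc, if_true]
          obtain ⟨m, nd, pr⟩ := ih s
          exact ⟨m, nd, fun y hy => ⟨(pr y hy).1, (pr y hy).2.1, List.mem_cons_of_mem _ (pr y hy).2.2⟩⟩
        · have hc : (PySem.Set.contains vis z || PySem.Set.contains s z) = false := by
            simp [pv_contains_eq, hv, hs]
          simp only [List.foldl_cons, pvStepB, hc, Bool.false_eq_true, if_false]
          rw [PySem.Set.add_of_not_mem hs, pv_foldB_prefix]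
          obtain ⟨m, nd, pr⟩ := ih (s ++ [z])
          refine ⟨?_, ?_, ?_⟩
          · intro y
            rw [m y]
            simp only [List.mem_append, List.mem_singleton, List.mem_cons]
            tauto
          · exact List.nodup_cons.mpr ⟨fun hz => (pr z hz).2.1 (by simp), nd⟩
          · intro y hy
            rcases List.mem_cons.1 hy with rfl | hy'
            · exact ⟨hv, hs, by simp⟩
            · obtain ⟨a, b, c⟩ := pr y hy'
              refine ⟨a, fun hys => b (by simp [hys]), List.mem_cons_of_mem _ c⟩

lemma pv_foldB_seen_mono (vis : List String) (l : List String) (q s : List String) :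
    ∀ y ∈ s, y ∈ (l.foldl (pvStepB vis) (q, s)).2 := by
  intro y hy
  rw [pv_foldB_prefix]
  exact ((pv_foldB_char vis l s).1 y).2 (Or.inl hy)

lemma pv_foldB_vis_congr (vis vis' s0 : List String)
    (hsub : ∀ y ∈ vis, y ∈ vis') (hd : ∀ y ∈ vis', y ∈ vis ∨ y ∈ s0) :
    ∀ (l q s : List String), (∀ y ∈ s0, y ∈ s) →
      l.foldl (pvStepB vis') (q, s) = l.foldl (pvStepB vis) (q, s) := by
  intro l
  induction l with
  | nil => intro q s _; rfl
  | cons z zs ih =>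
      intro q s hs0
      have hcond : (PySem.Set.contains vis' z || PySem.Set.contains s z) =
          (PySem.Set.contains vis z || PySem.Set.contains s z) := by
        simp only [pv_contains_eq]
        by_cases hzs : z ∈ s
        · simp [hzs]
        · by_cases hzv : z ∈ vis
          · simp [hzv, hsub z hzv]
          · have : z ∉ vis' := by
              intro hzv'
              rcases hd z hzv' with h | h
              · exact hzv h
              · exact hzs (hs0 z h)
            simp [hzv, this]
      simp only [List.foldl_cons, pvStepB, hcond]
      by_cases hc : (PySem.Set.contains vis z || PySem.Set.contains s z) = true
      · simp only [hc, if_true]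
        exact ih q s hs0
      · simp only [hc, Bool.false_eq_true, if_false]
        exact ih (q ++ [z]) (PySem.Set.add s z) (fun y hy => by
          have hzs : z ∉ s := by
            intro h; apply hc; simp [pv_contains_eq, h]
          rw [PySem.Set.add_of_not_mem hzs]
          exact List.mem_append_left _ (hs0 y hy))

lemma pv_disc_vis_congr (d : PySem.Dict String (List String)) (vis vis' s0 : List String)
    (hsub : ∀ y ∈ vis, y ∈ vis') (hd : ∀ y ∈ vis', y ∈ vis ∨ y ∈ s0) :
    ∀ (F seen : List String), (∀ y ∈ s0, y ∈ seen) →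
      pvDisc d vis' F seen = pvDisc d vis F seen := by
  intro F
  induction F with
  | nil => intro seen _; rfl
  | cons x xs ih =>
      intro seen hs0
      simp only [pvDisc]
      rw [pv_foldB_vis_congr vis vis' s0 hsub hd (pvNbr d x) [] seen hs0]
      rw [ih _ (fun y hy => pv_foldB_seen_mono vis (pvNbr d x) [] seen y (hs0 y hy))]

lemma pv_runB_layer (d : PySem.Dict String (List String)) :
    ∀ (F : List String) (fB : Nat) (vis order Q seen : List String),
      F.Nodup → (∀ x ∈ F, x ∉ vis) → (∀ x ∈ F, x ∈ seen) →
      pvQueue d (F.length + fB) vis order (F ++ Q) seen =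
        pvQueue d fB (vis ++ F) (order ++ F) (Q ++ (pvDisc d vis F seen).1)
          (pvDisc d vis F seen).2 := by
  intro F
  induction F with
  | nil => intro fB vis order Q seen _ _ _; simp [pvDisc]
  | cons x xs ih =>
      intro fB vis order Q seen hnd hv hs
      have hxv : x ∉ vis := hv x (List.mem_cons_self ..)
      have hxs : x ∈ seen := hs x (List.mem_cons_self ..)
      have hstep : pvQueue d ((x :: xs).length + fB) vis order ((x :: xs) ++ Q) seen =
          pvQueue d (xs.length + fB) (PySem.Set.add vis x) (order ++ [x])
            ((d.getD x []).foldl (pvStepB (PySem.Set.add vis x)) (xs ++ Q, seen)).1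
            ((d.getD x []).foldl (pvStepB (PySem.Set.add vis x)) (xs ++ Q, seen)).2 := by
        simp only [List.length_cons, List.cons_append]
        rw [show (xs.length + 1 + fB) = (xs.length + fB) + 1 by omega]
        rfl
      rw [hstep]
      rw [PySem.Dict.getD_eq_get?_getD]
      have hadd : PySem.Set.add vis x = vis ++ [x] := PySem.Set.add_of_not_mem hxv
      rw [hadd]
      have hcong : ((d.get? x).getD []).foldl (pvStepB (vis ++ [x])) (xs ++ Q, seen) =
          (pvNbr d x).foldl (pvStepB vis) (xs ++ Q, seen) := by
        rw [pv_foldB_vis_congr vis (vis ++ [x]) [x]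
          (fun y hy => List.mem_append_left _ hy)
          (fun y hy => by rcases List.mem_append.1 hy with h | h
                          · exact Or.inl h
                          · exact Or.inr h)
          _ _ _ (fun y hy => by rw [List.mem_singleton] at hy; rw [hy]; exact hxs)]
        rfl
      rw [hcong, pv_foldB_prefix]
      set p := (pvNbr d x).foldl (pvStepB vis) ([], seen) with hp
      have hrec := ih fB (vis ++ [x]) (order ++ [x]) (Q ++ p.1) p.2
        (List.nodup_cons.1 hnd).2
        (fun y hy => by
          intro hmem
          rcases List.mem_append.1 hmem with h | h
          · exact hv y (List.mem_cons_of_mem _ hy) h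
          · rw [List.mem_singleton] at h
            exact (List.nodup_cons.1 hnd).1 (h ▸ hy))
        (fun y hy => pv_foldB_seen_mono vis (pvNbr d x) [] seen y (hs y (List.mem_cons_of_mem _ hy)))
      rw [show ((xs ++ Q ++ p.1, p.2) : List String × List String).1 = xs ++ (Q ++ p.1) by
            simp [List.append_assoc],
          show ((xs ++ Q ++ p.1, p.2) : List String × List String).2 = p.2 from rfl, hrec]
      have hdcong : pvDisc d (vis ++ [x]) xs p.2 = pvDisc d vis xs p.2 := by
        apply pv_disc_vis_congr d vis (vis ++ [x]) [x]
          (fun y hy => List.mem_append_left _ hy)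
          (fun y hy => by rcases List.mem_append.1 hy with h | h
                          · exact Or.inl h
                          · exact Or.inr h)
        intro y hy
        rw [List.mem_singleton] at hy
        rw [hy]
        exact pv_foldB_seen_mono vis (pvNbr d x) [] seen x hxs
      rw [hdcong]
      show _ = pvQueue d fB (vis ++ (x :: xs)) (order ++ (x :: xs))
          (Q ++ (p.1 ++ (pvDisc d vis xs p.2).1)) (pvDisc d vis xs p.2).2
      simp [List.append_assoc]

lemma pv_foldA_inner_vis (vis : List String) (l : List String) :
    ∀ (acc : List String), (∀ y ∈ l, y ∈ vis) →
      l.foldl (fun nx nw => if PySem.Set.contains vis nw then nx else PySem.Set.add nx nw) acc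
        = acc := by
  induction l with
  | nil => intro acc _; rfl
  | cons z zs ih =>
      intro acc h
      have hz : PySem.Set.contains vis z = true := by
        rw [pv_contains_eq]; simp [h z (List.mem_cons_self ..)]
      simp only [List.foldl_cons, hz, if_true]
      exact ih acc (fun y hy => h y (List.mem_cons_of_mem _ hy))

lemma pv_foldA_stale (d : PySem.Dict String (List String)) :
    ∀ (todo : List String) (vis conn acc : List String),
      (∀ x ∈ todo, x ∈ conn) → (∀ y ∈ conn, y ∈ vis) →
      (∀ x ∈ todo, ∀ y ∈ pvNbr d x, y ∈ vis) →
      todo.foldl (pvLayerStepA d) (vis, conn, acc) = (vis, conn, acc) := by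
  intro todo
  induction todo with
  | nil => intro vis conn acc _ _ _; rfl
  | cons x xs ih =>
      intro vis conn acc hc hcv hn
      have hxc : x ∈ conn := hc x (List.mem_cons_self ..)
      rw [List.foldl_cons, pv_layer_step_eq]
      rw [PySem.Set.add_of_mem (hcv x hxc), PySem.Set.add_of_mem hxc]
      rw [pv_foldA_inner_vis vis _ acc (fun y hy => hn x (List.mem_cons_self ..) y hy)]
      exact ih vis conn acc (fun y hy => hc y (List.mem_cons_of_mem _ hy)) hcv
        (fun y hy => hn y (List.mem_cons_of_mem _ hy))

-- A's inner neighbour fold (the `for nextWord in similarWords[currWord]` loop)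
def pvInnerA (vis : List String) (acc l : List String) : List String :=
  l.foldl (fun nx nw => if PySem.Set.contains vis nw then nx else PySem.Set.add nx nw) acc

-- "genuinely new this layer": not already connected, not in the current layer
def pvP (conn todo : List String) : String → Bool :=
  fun y => !(decide (y ∈ conn) || decide (y ∈ todo))

lemma pv_innerA_fresh (vis conn todo : List String) (x : String)
    (hcv : ∀ y ∈ conn, y ∈ vis) (hxt : x ∈ todo) :
    ∀ (l acc seen : List String),
      (∀ y, y ∈ seen ↔ y ∈ conn ∨ y ∈ todo ∨ y ∈ acc) → acc.Nodup →
      (∀ y ∈ acc, y ∈ vis → y ∈ conn) →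
      ((pvInnerA (vis ++ [x]) acc l).filter (pvP conn todo) =
          acc.filter (pvP conn todo) ++ (l.foldl (pvStepB vis) ([], seen)).1)
      ∧ (∀ y, y ∈ (l.foldl (pvStepB vis) ([], seen)).2 ↔
            y ∈ conn ∨ y ∈ todo ∨ y ∈ pvInnerA (vis ++ [x]) acc l)
      ∧ (pvInnerA (vis ++ [x]) acc l).Nodup
      ∧ (∀ y ∈ pvInnerA (vis ++ [x]) acc l, y ∈ acc ∨ y ∈ l)
      ∧ (∀ y ∈ pvInnerA (vis ++ [x]) acc l, y ∉ acc → y ∉ vis ∧ y ≠ x)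
      ∧ (∀ y ∈ l, y ∈ vis ∨ y = x ∨ y ∈ pvInnerA (vis ++ [x]) acc l)
      ∧ (∀ y ∈ acc, y ∈ pvInnerA (vis ++ [x]) acc l) := by
  intro l
  induction l with
  | nil =>
      intro acc seen hseen hnd hvp
      refine ⟨by simp [pvInnerA], fun y => by simpa [pvInnerA] using hseen y,
        by simpa [pvInnerA] using hnd, by simp [pvInnerA],
        by simp only [pvInnerA, List.foldl_nil]; exact fun y hy hna => absurd hy hna,
        by simp, by simp [pvInnerA]⟩
  | cons nw l' ih =>
      intro acc seen hseen hnd hvp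
      -- skip case helper: both sides ignore nw
      by_cases h1 : nw ∈ vis
      case pos =>
        have ca : pvInnerA (vis ++ [x]) acc (nw :: l') = pvInnerA (vis ++ [x]) acc l' := by
          have : PySem.Set.contains (vis ++ [x]) nw = true := by
            rw [pv_contains_eq]; simp [List.mem_append, h1]
          simp only [pvInnerA, List.foldl_cons, this, if_true]
        have cb : (nw :: l').foldl (pvStepB vis) ([], seen) =
            l'.foldl (pvStepB vis) ([], seen) := by
          have : (PySem.Set.contains vis nw || PySem.Set.contains seen nw) = true := by
            simp [pv_contains_eq, h1]
          simp only [List.foldl_cons, pvStepB, this, if_true]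
        rw [ca, cb]
        obtain ⟨c1, c2, c3, c4, c5, c6, c7⟩ := ih acc seen hseen hnd hvp
        exact ⟨c1, c2, c3, fun y hy => (c4 y hy).imp id (List.mem_cons_of_mem _), c5,
          fun y hy => by
            rcases List.mem_cons.1 hy with rfl | hy'
            · exact Or.inl h1
            · exact c6 y hy', c7⟩
      case neg =>
      by_cases h2 : nw = x
      case pos =>
        have ca : pvInnerA (vis ++ [x]) acc (nw :: l') = pvInnerA (vis ++ [x]) acc l' := by
          have : PySem.Set.contains (vis ++ [x]) nw = true := by
            rw [pv_contains_eq]; simp [List.mem_append, h2]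
          simp only [pvInnerA, List.foldl_cons, this, if_true]
        have cb : (nw :: l').foldl (pvStepB vis) ([], seen) =
            l'.foldl (pvStepB vis) ([], seen) := by
          have : (PySem.Set.contains vis nw || PySem.Set.contains seen nw) = true := by
            simp [pv_contains_eq, (hseen nw).2 (Or.inr (Or.inl (h2 ▸ hxt)))]
          simp only [List.foldl_cons, pvStepB, this, if_true]
        rw [ca, cb]
        obtain ⟨c1, c2, c3, c4, c5, c6, c7⟩ := ih acc seen hseen hnd hvp
        exact ⟨c1, c2, c3, fun y hy => (c4 y hy).imp id (List.mem_cons_of_mem _), c5,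
          fun y hy => by
            rcases List.mem_cons.1 hy with rfl | hy'
            · exact Or.inr (Or.inl h2)
            · exact c6 y hy', c7⟩
      case neg =>
      have hcaF : PySem.Set.contains (vis ++ [x]) nw = false := by
        rw [pv_contains_eq]; simp [List.mem_append, h1, h2]
      by_cases h3 : nw ∈ acc
      case pos =>
        have ca : pvInnerA (vis ++ [x]) acc (nw :: l') = pvInnerA (vis ++ [x]) acc l' := by
          simp only [pvInnerA, List.foldl_cons, hcaF, Bool.false_eq_true, if_false, PySem.Set.add_of_mem h3]
        have cb : (nw :: l').foldl (pvStepB vis) ([], seen) =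
            l'.foldl (pvStepB vis) ([], seen) := by
          have : (PySem.Set.contains vis nw || PySem.Set.contains seen nw) = true := by
            simp [pv_contains_eq, (hseen nw).2 (Or.inr (Or.inr h3))]
          simp only [List.foldl_cons, pvStepB, this, if_true]
        rw [ca, cb]
        obtain ⟨c1, c2, c3, c4, c5, c6, c7⟩ := ih acc seen hseen hnd hvp
        exact ⟨c1, c2, c3, fun y hy => (c4 y hy).imp id (List.mem_cons_of_mem _), c5,
          fun y hy => by
            rcases List.mem_cons.1 hy with rfl | hy'
            · exact Or.inr (Or.inr (c7 y h3))
            · exact c6 y hy', c7⟩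
      case neg =>
      have hnda : (acc ++ [nw]).Nodup := by
        simp only [List.nodup_append, List.nodup_singleton, true_and]
        refine ⟨hnd, ?_⟩
        intro a ha b hb
        rw [List.mem_singleton] at hb
        subst hb
        intro h
        exact h3 (h ▸ ha)
      have hvpa : ∀ y ∈ acc ++ [nw], y ∈ vis → y ∈ conn := by
        intro y hy hyv
        rcases List.mem_append.1 hy with hy' | hy'
        · exact hvp y hy' hyv
        · rw [List.mem_singleton] at hy'
          exact absurd hyv (hy' ▸ h1)
      have ca : pvInnerA (vis ++ [x]) acc (nw :: l') = pvInnerA (vis ++ [x]) (acc ++ [nw]) l' := by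
        simp only [pvInnerA, List.foldl_cons, hcaF, Bool.false_eq_true, if_false, PySem.Set.add_of_not_mem h3]
      by_cases h4 : nw ∈ todo
      case pos =>
        have cb : (nw :: l').foldl (pvStepB vis) ([], seen) =
            l'.foldl (pvStepB vis) ([], seen) := by
          have : (PySem.Set.contains vis nw || PySem.Set.contains seen nw) = true := by
            simp [pv_contains_eq, (hseen nw).2 (Or.inr (Or.inl h4))]
          simp only [List.foldl_cons, pvStepB, this, if_true]
        rw [ca, cb]
        obtain ⟨c1, c2, c3, c4, c5, c6, c7⟩ := ih (acc ++ [nw]) seen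
          (fun y => ⟨fun hy => ((hseen y).1 hy).imp id (Or.imp id (fun h => List.mem_append_left _ h)),
            fun hy => by
              rcases hy with hy | hy | hy
              · exact (hseen y).2 (Or.inl hy)
              · exact (hseen y).2 (Or.inr (Or.inl hy))
              · rcases List.mem_append.1 hy with hy' | hy'
                · exact (hseen y).2 (Or.inr (Or.inr hy'))
                · rw [List.mem_singleton] at hy'
                  exact (hseen y).2 (Or.inr (Or.inl (hy' ▸ h4)))⟩)
          hnda hvpa
        refine ⟨?_, c2, c3, ?_, ?_, ?_, ?_⟩
        · rw [c1, List.filter_append]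
          simp [pvP, h4]
        · intro y hy
          rcases c4 y hy with hy' | hy'
          · rcases List.mem_append.1 hy' with h | h
            · exact Or.inl h
            · rw [List.mem_singleton] at h
              exact Or.inr (h ▸ List.mem_cons_self ..)
          · exact Or.inr (List.mem_cons_of_mem _ hy')
        · intro y hy hyna
          by_cases hynw : y = nw
          · exact ⟨hynw ▸ h1, hynw ▸ h2⟩
          · exact c5 y hy (fun hc => by
              rcases List.mem_append.1 hc with h | h
              · exact hyna h
              · rw [List.mem_singleton] at h; exact hynw h)
        · intro y hy
          rcases List.mem_cons.1 hy with rfl | hy'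
          · exact Or.inr (Or.inr (c7 y (List.mem_append_right _ (List.mem_singleton.2 rfl))))
          · exact c6 y hy'
        · exact fun y hy => c7 y (List.mem_append_left _ hy)
      case neg =>
        have h5 : nw ∉ conn := fun hc => h1 (hcv nw hc)
        have h6 : nw ∉ seen := fun hs => by
          rcases (hseen nw).1 hs with h | h | h
          · exact h5 h
          · exact h4 h
          · exact h3 h
        have cb : (nw :: l').foldl (pvStepB vis) ([], seen) =
            ([nw] ++ (l'.foldl (pvStepB vis) ([], seen ++ [nw])).1,
             (l'.foldl (pvStepB vis) ([], seen ++ [nw])).2) := by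
          have hcb : (PySem.Set.contains vis nw || PySem.Set.contains seen nw) = false := by
            simp [pv_contains_eq, h1, h6]
          simp only [List.foldl_cons, pvStepB, hcb, Bool.false_eq_true, if_false]
          rw [PySem.Set.add_of_not_mem h6, List.nil_append]
          rw [show ([nw], seen ++ [nw]) = (([] : List String) ++ [nw], seen ++ [nw]) by simp]
          rw [pv_foldB_prefix]
          simp
        rw [ca, cb]
        obtain ⟨c1, c2, c3, c4, c5, c6, c7⟩ := ih (acc ++ [nw]) (seen ++ [nw])
          (fun y => by
            constructor
            · intro hy
              rcases List.mem_append.1 hy with hy' | hy'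
              · exact ((hseen y).1 hy').imp id (Or.imp id (fun h => List.mem_append_left _ h))
              · exact Or.inr (Or.inr (List.mem_append_right _ hy'))
            · intro hy
              rcases hy with hy | hy | hy
              · exact List.mem_append_left _ ((hseen y).2 (Or.inl hy))
              · exact List.mem_append_left _ ((hseen y).2 (Or.inr (Or.inl hy)))
              · rcases List.mem_append.1 hy with hy' | hy'
                · exact List.mem_append_left _ ((hseen y).2 (Or.inr (Or.inr hy')))
                · exact List.mem_append_right _ hy')
          hnda hvpa
        refine ⟨?_, ?_, c3, ?_, ?_, ?_, ?_⟩
        · rw [c1, List.filter_append]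
          have : [nw].filter (pvP conn todo) = [nw] := by
            simp [pvP, h4, h5]
          rw [this]
          simp [List.append_assoc]
        · intro y
          rw [c2 y]
        · intro y hy
          rcases c4 y hy with hy' | hy'
          · rcases List.mem_append.1 hy' with h | h
            · exact Or.inl h
            · rw [List.mem_singleton] at h
              exact Or.inr (h ▸ List.mem_cons_self ..)
          · exact Or.inr (List.mem_cons_of_mem _ hy')
        · intro y hy hyna
          by_cases hynw : y = nw
          · exact ⟨hynw ▸ h1, hynw ▸ h2⟩
          · exact c5 y hy (fun hc => by
              rcases List.mem_append.1 hc with h | h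
              · exact hyna h
              · rw [List.mem_singleton] at h; exact hynw h)
        · intro y hy
          rcases List.mem_cons.1 hy with rfl | hy'
          · exact Or.inr (Or.inr (c7 y (List.mem_append_right _ (List.mem_singleton.2 rfl))))
          · exact c6 y hy'
        · exact fun y hy => c7 y (List.mem_append_left _ hy)

lemma pv_innerA_stale (vis conn todo : List String) :
    ∀ (l acc : List String),
      (∀ y ∈ l, y ∈ vis ∨ y ∈ todo ∨ y ∈ acc) → acc.Nodup →
      ((pvInnerA vis acc l).filter (pvP conn todo) = acc.filter (pvP conn todo)
      ∧ (pvInnerA vis acc l).Nodup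
      ∧ (∀ y ∈ pvInnerA vis acc l, y ∈ acc ∨ y ∈ l)
      ∧ (∀ y ∈ pvInnerA vis acc l, y ∉ acc → y ∉ vis)
      ∧ (∀ y ∈ l, y ∈ vis ∨ y ∈ pvInnerA vis acc l)
      ∧ (∀ y ∈ acc, y ∈ pvInnerA vis acc l)
      ∧ (∀ y, (y ∈ conn ∨ y ∈ todo ∨ y ∈ pvInnerA vis acc l) ↔
              (y ∈ conn ∨ y ∈ todo ∨ y ∈ acc))) := by
  intro l
  induction l with
  | nil =>
      intro acc hl hnd
      exact ⟨rfl, by simpa [pvInnerA] using hnd, by simp [pvInnerA],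
        by simp only [pvInnerA, List.foldl_nil]; exact fun y hy hna => absurd hy hna,
        by simp, by simp [pvInnerA], fun y => Iff.rfl⟩
  | cons nw l' ih =>
      intro acc hl hnd
      by_cases h1 : nw ∈ vis
      case pos =>
        have ca : pvInnerA vis acc (nw :: l') = pvInnerA vis acc l' := by
          have : PySem.Set.contains vis nw = true := by
            rw [pv_contains_eq]; simp [h1]
          simp only [pvInnerA, List.foldl_cons, this, if_true]
        rw [ca]
        obtain ⟨c1, c2, c3, c4, c5, c6, c7⟩ := ih acc
          (fun y hy => hl y (List.mem_cons_of_mem _ hy)) hnd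
        exact ⟨c1, c2, fun y hy => (c3 y hy).imp id (List.mem_cons_of_mem _), c4,
          fun y hy => by
            rcases List.mem_cons.1 hy with rfl | hy'
            · exact Or.inl h1
            · exact c5 y hy', c6, c7⟩
      case neg =>
      have hcaF : PySem.Set.contains vis nw = false := by
        rw [pv_contains_eq]; simp [h1]
      by_cases h3 : nw ∈ acc
      case pos =>
        have ca : pvInnerA vis acc (nw :: l') = pvInnerA vis acc l' := by
          simp only [pvInnerA, List.foldl_cons, hcaF, Bool.false_eq_true, if_false,
            PySem.Set.add_of_mem h3]
        rw [ca]
        obtain ⟨c1, c2, c3, c4, c5, c6, c7⟩ := ih acc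
          (fun y hy => hl y (List.mem_cons_of_mem _ hy)) hnd
        exact ⟨c1, c2, fun y hy => (c3 y hy).imp id (List.mem_cons_of_mem _), c4,
          fun y hy => by
            rcases List.mem_cons.1 hy with rfl | hy'
            · exact Or.inr (c6 y h3)
            · exact c5 y hy', c6, c7⟩
      case neg =>
      have h4 : nw ∈ todo := by
        rcases hl nw (List.mem_cons_self ..) with h | h | h
        · exact absurd h h1
        · exact h
        · exact absurd h h3
      have ca : pvInnerA vis acc (nw :: l') = pvInnerA vis (acc ++ [nw]) l' := by
        simp only [pvInnerA, List.foldl_cons, hcaF, Bool.false_eq_true, if_false,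
          PySem.Set.add_of_not_mem h3]
      rw [ca]
      have hnda : (acc ++ [nw]).Nodup := by
        simp only [List.nodup_append, List.nodup_singleton, true_and]
        refine ⟨hnd, ?_⟩
        intro a ha b hb
        rw [List.mem_singleton] at hb
        subst hb
        intro h
        exact h3 (h ▸ ha)
      obtain ⟨c1, c2, c3, c4, c5, c6, c7⟩ := ih (acc ++ [nw])
        (fun y hy => (hl y (List.mem_cons_of_mem _ hy)).imp id
          (Or.imp id (fun h => List.mem_append_left _ h))) hnda
      refine ⟨?_, c2, ?_, ?_, ?_, ?_, ?_⟩
      · rw [c1, List.filter_append]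
        simp [pvP, h4]
      · intro y hy
        rcases c3 y hy with hy' | hy'
        · rcases List.mem_append.1 hy' with h | h
          · exact Or.inl h
          · rw [List.mem_singleton] at h
            exact Or.inr (h ▸ List.mem_cons_self ..)
        · exact Or.inr (List.mem_cons_of_mem _ hy')
      · intro y hy hyna
        by_cases hynw : y = nw
        · exact hynw ▸ h1
        · exact c4 y hy (fun hc => by
            rcases List.mem_append.1 hc with h | h
            · exact hyna h
            · rw [List.mem_singleton] at h; exact hynw h)
      · intro y hy
        rcases List.mem_cons.1 hy with rfl | hy'
        · exact Or.inr (c6 y (List.mem_append_right _ (List.mem_singleton.2 rfl)))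
        · exact c5 y hy'
      · exact fun y hy => c6 y (List.mem_append_left _ hy)
      · intro y
        rw [c7 y]
        constructor
        · intro h
          rcases h with h | h | h
          · exact Or.inl h
          · exact Or.inr (Or.inl h)
          · rcases List.mem_append.1 h with h' | h'
            · exact Or.inr (Or.inr h')
            · rw [List.mem_singleton] at h'
              exact Or.inr (Or.inl (h' ▸ h4))
        · intro h
          rcases h with h | h | h
          · exact Or.inl h
          · exact Or.inr (Or.inl h)
          · exact Or.inr (Or.inr (List.mem_append_left _ h))

lemma pv_layerA_sim (d : PySem.Dict String (List String)) :
    ∀ (todo vis conn acc seen : List String),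
      todo.Nodup → acc.Nodup →
      (∀ y ∈ conn, y ∈ vis) →
      (∀ x ∈ todo, x ∉ conn → x ∉ vis) →
      (∀ x ∈ todo, x ∈ conn → ∀ y ∈ pvNbr d x, y ∈ vis ∨ y ∈ todo ∨ y ∈ acc) →
      (∀ x ∈ acc, x ∈ conn → ∀ y ∈ pvNbr d x, y ∈ vis ∨ y ∈ acc) →
      (∀ y, y ∈ seen ↔ y ∈ conn ∨ y ∈ todo ∨ y ∈ acc) →
      (∀ y ∈ acc, y ∈ vis → y ∈ conn) →
      ((todo.foldl (pvLayerStepA d) (vis, conn, acc)).1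
          = vis ++ todo.filter (fun x => !decide (x ∈ conn)))
      ∧ ((todo.foldl (pvLayerStepA d) (vis, conn, acc)).2.1
          = conn ++ todo.filter (fun x => !decide (x ∈ conn)))
      ∧ ((todo.foldl (pvLayerStepA d) (vis, conn, acc)).2.2.filter (pvP conn todo)
          = acc.filter (pvP conn todo)
            ++ (pvDisc d vis (todo.filter (fun x => !decide (x ∈ conn))) seen).1)
      ∧ (∀ y, y ∈ (pvDisc d vis (todo.filter (fun x => !decide (x ∈ conn))) seen).2 ↔
            y ∈ conn ∨ y ∈ todo ∨ y ∈ (todo.foldl (pvLayerStepA d) (vis, conn, acc)).2.2)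
      ∧ (todo.foldl (pvLayerStepA d) (vis, conn, acc)).2.2.Nodup
      ∧ (∀ y ∈ (todo.foldl (pvLayerStepA d) (vis, conn, acc)).2.2,
            y ∈ vis ++ todo.filter (fun x => !decide (x ∈ conn)) →
            y ∈ conn ++ todo.filter (fun x => !decide (x ∈ conn)))
      ∧ (∀ x' ∈ (todo.foldl (pvLayerStepA d) (vis, conn, acc)).2.2,
            x' ∈ conn ++ todo.filter (fun x => !decide (x ∈ conn)) →
            ∀ y ∈ pvNbr d x', y ∈ vis ++ todo.filter (fun x => !decide (x ∈ conn))
              ∨ y ∈ (todo.foldl (pvLayerStepA d) (vis, conn, acc)).2.2)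
      ∧ (∀ y ∈ (todo.foldl (pvLayerStepA d) (vis, conn, acc)).2.2,
            y ∈ acc ∨ ∃ x ∈ todo, y ∈ pvNbr d x) := by
  intro todo
  induction todo with
  | nil =>
      intro vis conn acc seen hnd hand hcv hF3 hI4t hI4a hs hvp
      refine ⟨by simp, by simp, by simp [pvDisc], ?_, hand, ?_, ?_, ?_⟩
      · intro y
        simp only [List.filter_nil, pvDisc, List.foldl_nil]
        rw [hs y]
      · intro y hy h
        simp only [List.filter_nil, List.append_nil] at h ⊢
        exact hvp y hy h
      · intro x' hx' hc y hyn
        simp only [List.filter_nil, List.append_nil] at hc ⊢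
        exact (hI4a x' hx' hc y hyn).imp id id
      · exact fun y hy => Or.inl hy
  | cons x xs ih =>
      intro vis conn acc seen hnd hand hcv hF3 hI4t hI4a hs hvp
      have hxnotxs : x ∉ xs := (List.nodup_cons.1 hnd).1
      have hndxs : xs.Nodup := (List.nodup_cons.1 hnd).2
      by_cases hxc : x ∈ conn
      case pos =>
        -- stale head: state unchanged except acc picks up already-known elements
        have hFcons : (x :: xs).filter (fun x => !decide (x ∈ conn))
            = xs.filter (fun x => !decide (x ∈ conn)) := by
          simp [List.filter_cons, hxc]
        have hstep : (x :: xs).foldl (pvLayerStepA d) (vis, conn, acc)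
            = xs.foldl (pvLayerStepA d) (vis, conn, pvInnerA vis acc (pvNbr d x)) := by
          rw [List.foldl_cons, pv_layer_step_eq]
          rw [PySem.Set.add_of_mem (hcv x hxc), PySem.Set.add_of_mem hxc]
          rfl
        obtain ⟨c1, c2, c3, c4, c5, c6, c7⟩ := pv_innerA_stale vis conn (x :: xs)
          (pvNbr d x) acc (hI4t x (List.mem_cons_self ..) hxc) hand
        set acc1 := pvInnerA vis acc (pvNbr d x) with hacc1
        have hPeq : pvP conn (x :: xs) = pvP conn xs := by
          funext y
          simp only [pvP, List.mem_cons]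
          by_cases hy : y ∈ conn
          · simp [hy]
          · have : ¬ y = x := fun h => hy (h ▸ hxc)
            simp [hy, this]
        obtain ⟨i1, i2, i3, i4, i5, i6, i7, i8⟩ := ih vis conn acc1 seen hndxs c2 hcv
          (fun y hy => hF3 y (List.mem_cons_of_mem _ hy))
          (fun x' hx' hc y hyn => by
            rcases hI4t x' (List.mem_cons_of_mem _ hx') hc y hyn with h | h | h
            · exact Or.inl h
            · rcases List.mem_cons.1 h with rfl | h'
              · exact Or.inl (hcv _ hxc)
              · exact Or.inr (Or.inl h')
            · exact Or.inr (Or.inr (c6 y h)))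
          (fun x' hx' hc y hyn => by
            rcases c3 x' hx' with h | h
            · exact (hI4a x' h hc y hyn).imp id (fun h' => c6 y h')
            · by_cases hxa : x' ∈ acc
              · exact (hI4a x' hxa hc y hyn).imp id (fun h' => c6 y h')
              · exact absurd (hcv x' hc) (c4 x' hx' hxa))
          (fun y => by
            rw [hs y]
            have h7 := c7 y
            constructor
            · intro h
              rcases (h7.2 (by
                  rcases h with h | h | h
                  · exact Or.inl h
                  · exact Or.inr (Or.inl h)
                  · exact Or.inr (Or.inr h))) with h | h | h
              · exact Or.inl h
              · rcases List.mem_cons.1 h with rfl | h'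
                · exact Or.inl hxc
                · exact Or.inr (Or.inl h')
              · exact Or.inr (Or.inr h)
            · intro h
              rcases h7.1 (by
                  rcases h with h | h | h
                  · exact Or.inl h
                  · exact Or.inr (Or.inl (List.mem_cons_of_mem _ h))
                  · exact Or.inr (Or.inr h)) with h | h | h
              · exact Or.inl h
              · exact Or.inr (Or.inl h)
              · exact Or.inr (Or.inr h))
          (fun y hy hyv => by
            rcases c3 y hy with h | h
            · exact hvp y h hyv
            · by_cases hya : y ∈ acc
              · exact hvp y hya hyv
              · exact absurd hyv (c4 y hy hya))
        rw [hstep, hFcons]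
        refine ⟨i1, i2, ?_, ?_, i5, i6, i7, ?_⟩
        · rw [hPeq]
          rw [i3]
          rw [← hPeq, c1, hPeq]
        · intro y
          rw [i4 y]
          constructor
          · intro h
            rcases h with h | h | h
            · exact Or.inl h
            · exact Or.inr (Or.inl (List.mem_cons_of_mem _ h))
            · exact Or.inr (Or.inr h)
          · intro h
            rcases h with h | h | h
            · exact Or.inl h
            · rcases List.mem_cons.1 h with rfl | h'
              · exact Or.inl hxc
              · exact Or.inr (Or.inl h')
            · exact Or.inr (Or.inr h)
        · intro y hy
          rcases i8 y hy with h | h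
          · rcases c3 y h with h' | h'
            · exact Or.inl h'
            · exact Or.inr ⟨x, List.mem_cons_self .., h'⟩
          · obtain ⟨x', hx', hn⟩ := h
            exact Or.inr ⟨x', List.mem_cons_of_mem _ hx', hn⟩
      case neg =>
        -- fresh head
        have hxv : x ∉ vis := hF3 x (List.mem_cons_self ..) hxc
        have hFcons : (x :: xs).filter (fun x => !decide (x ∈ conn))
            = x :: xs.filter (fun x => !decide (x ∈ conn)) := by
          simp [List.filter_cons, hxc]
        have hstep : (x :: xs).foldl (pvLayerStepA d) (vis, conn, acc)
            = xs.foldl (pvLayerStepA d)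
                (vis ++ [x], conn ++ [x], pvInnerA (vis ++ [x]) acc (pvNbr d x)) := by
          rw [List.foldl_cons, pv_layer_step_eq]
          rw [PySem.Set.add_of_not_mem hxv, PySem.Set.add_of_not_mem hxc]
          rfl
        obtain ⟨c1, c2, c3, c4, c5, c6, c7⟩ := pv_innerA_fresh vis conn (x :: xs) x hcv
          (List.mem_cons_self ..) (pvNbr d x) acc seen hs hand hvp
        set acc1 := pvInnerA (vis ++ [x]) acc (pvNbr d x) with hacc1
        set p := (pvNbr d x).foldl (pvStepB vis) ([], seen) with hp
        have hxseen : x ∈ p.2 :=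
          pv_foldB_seen_mono vis (pvNbr d x) [] seen x ((hs x).2 (Or.inr (Or.inl (List.mem_cons_self ..))))
        have hPeq : pvP conn (x :: xs) = pvP (conn ++ [x]) xs := by
          funext y
          simp only [pvP, List.mem_cons, List.mem_append, List.mem_singleton]
          by_cases hy : y ∈ conn
          · simp [hy]
          · by_cases hyx : y = x
            · simp [hy, hyx]
            · simp [hy, hyx]
        have hFeq : xs.filter (fun y => !decide (y ∈ conn ++ [x]))
            = xs.filter (fun y => !decide (y ∈ conn)) := by
          apply List.filter_congr
          intro y hy
          have : ¬ y = x := fun h => hxnotxs (h ▸ hy)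
          simp [List.mem_append, this]
        obtain ⟨i1, i2, i3, i4, i5, i6, i7, i8⟩ := ih (vis ++ [x]) (conn ++ [x]) acc1 p.2
          hndxs c3
          (fun y hy => by
            rcases List.mem_append.1 hy with h | h
            · exact List.mem_append_left _ (hcv y h)
            · exact List.mem_append_right _ h)
          (fun y hy hyc => by
            have hyC : y ∉ conn := fun h => hyc (List.mem_append_left _ h)
            have hyx : ¬ y = x := fun h => hxnotxs (h ▸ hy)
            intro hmem
            rcases List.mem_append.1 hmem with h | h
            · exact hF3 y (List.mem_cons_of_mem _ hy) hyC h
            · rw [List.mem_singleton] at h; exact hyx h)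
          (fun x' hx' hc y hyn => by
            rcases List.mem_append.1 hc with hcc | hcc
            · rcases hI4t x' (List.mem_cons_of_mem _ hx') hcc y hyn with h | h | h
              · exact Or.inl (List.mem_append_left _ h)
              · rcases List.mem_cons.1 h with rfl | h'
                · exact Or.inl (List.mem_append_right _ (List.mem_singleton.2 rfl))
                · exact Or.inr (Or.inl h')
              · exact Or.inr (Or.inr (c7 y h))
            · rw [List.mem_singleton] at hcc
              exact absurd (hcc ▸ hx') hxnotxs)
          (fun x' hx' hc y hyn => by
            by_cases hxa : x' ∈ acc
            · rcases List.mem_append.1 hc with hcc | hcc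
              · exact (hI4a x' hxa hcc y hyn).imp (fun h => List.mem_append_left _ h)
                  (fun h => c7 y h)
              · rw [List.mem_singleton] at hcc
                subst hcc
                rcases c6 y hyn with h | h | h
                · exact Or.inl (List.mem_append_left _ h)
                · exact Or.inl (List.mem_append_right _ (List.mem_singleton.2 h))
                · exact Or.inr h
            · obtain ⟨hnv, hnx⟩ := c5 x' hx' hxa
              rcases List.mem_append.1 hc with hcc | hcc
              · exact absurd (hcv x' hcc) hnv
              · rw [List.mem_singleton] at hcc
                exact absurd hcc hnx)
          (fun y => by
            rw [c2 y]
            constructor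
            · intro h
              rcases h with h | h | h
              · exact Or.inl (List.mem_append_left _ h)
              · rcases List.mem_cons.1 h with rfl | h'
                · exact Or.inl (List.mem_append_right _ (List.mem_singleton.2 rfl))
                · exact Or.inr (Or.inl h')
              · exact Or.inr (Or.inr h)
            · intro h
              rcases h with h | h | h
              · rcases List.mem_append.1 h with h' | h'
                · exact Or.inl h'
                · rw [List.mem_singleton] at h'
                  exact Or.inr (Or.inl (h' ▸ List.mem_cons_self ..))
              · exact Or.inr (Or.inl (List.mem_cons_of_mem _ h))
              · exact Or.inr (Or.inr h))
          (fun y hy hyv => by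
            by_cases hya : y ∈ acc
            · rcases List.mem_append.1 hyv with h | h
              · exact List.mem_append_left _ (hvp y hya h)
              · exact List.mem_append_right _ h
            · obtain ⟨hnv, hnx⟩ := c5 y hy hya
              rcases List.mem_append.1 hyv with h | h
              · exact absurd h hnv
              · rw [List.mem_singleton] at h
                exact absurd h hnx)
        rw [hFeq] at i1 i2 i3 i4 i6 i7
        have hdcong : pvDisc d (vis ++ [x]) (xs.filter (fun y => !decide (y ∈ conn))) p.2
            = pvDisc d vis (xs.filter (fun y => !decide (y ∈ conn))) p.2 := by
          apply pv_disc_vis_congr d vis (vis ++ [x]) [x]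
            (fun y hy => List.mem_append_left _ hy)
            (fun y hy => (List.mem_append.1 hy).imp id id)
          intro y hy
          rw [List.mem_singleton] at hy
          exact hy ▸ hxseen
        rw [hdcong] at i3 i4
        rw [hstep, hFcons]
        have hddef : pvDisc d vis (x :: xs.filter (fun y => !decide (y ∈ conn))) seen
            = (p.1 ++ (pvDisc d vis (xs.filter (fun y => !decide (y ∈ conn))) p.2).1,
               (pvDisc d vis (xs.filter (fun y => !decide (y ∈ conn))) p.2).2) := by
          simp only [pvDisc, ← hp]
        refine ⟨?_, ?_, ?_, ?_, i5, ?_, ?_, ?_⟩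
        · rw [i1]; simp
        · rw [i2]; simp
        · rw [hPeq, i3, ← hPeq, c1, hPeq, hddef]
          simp [List.append_assoc, ← hPeq]
        · intro y
          rw [hddef]
          simp only []
          rw [i4 y]
          constructor
          · intro h
            rcases h with h | h | h
            · rcases List.mem_append.1 h with h' | h'
              · exact Or.inl h'
              · rw [List.mem_singleton] at h'
                exact Or.inr (Or.inl (h' ▸ List.mem_cons_self ..))
            · exact Or.inr (Or.inl (List.mem_cons_of_mem _ h))
            · exact Or.inr (Or.inr h)
          · intro h
            rcases h with h | h | h
            · exact Or.inl (List.mem_append_left _ h)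
            · rcases List.mem_cons.1 h with rfl | h'
              · exact Or.inl (List.mem_append_right _ (List.mem_singleton.2 rfl))
              · exact Or.inr (Or.inl h')
            · exact Or.inr (Or.inr h)
        · intro y hy hmem
          have := i6 y hy (by
            rcases List.mem_append.1 hmem with h | h
            · exact List.mem_append_left _ (List.mem_append_left _ h)
            · rcases List.mem_cons.1 h with rfl | h'
              · exact List.mem_append_left _ (List.mem_append_right _ (List.mem_singleton.2 rfl))
              · exact List.mem_append_right _ h')
          rcases List.mem_append.1 this with h | h
          · rcases List.mem_append.1 h with h' | h'
            · exact List.mem_append_left _ h'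
            · rw [List.mem_singleton] at h'
              exact List.mem_append_right _ (h' ▸ List.mem_cons_self ..)
          · exact List.mem_append_right _ (List.mem_cons_of_mem _ h)
        · intro x' hx' hc y hyn
          have := i7 x' hx' (by
            rcases List.mem_append.1 hc with h | h
            · exact List.mem_append_left _ (List.mem_append_left _ h)
            · rcases List.mem_cons.1 h with rfl | h'
              · exact List.mem_append_left _ (List.mem_append_right _ (List.mem_singleton.2 rfl))
              · exact List.mem_append_right _ h') y hyn
          rcases this with h | h
          · rcases List.mem_append.1 h with h' | h'
            · rcases List.mem_append.1 h' with h'' | h''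
              · exact Or.inl (List.mem_append_left _ h'')
              · rw [List.mem_singleton] at h''
                exact Or.inl (List.mem_append_right _ (h'' ▸ List.mem_cons_self ..))
            · exact Or.inl (List.mem_append_right _ (List.mem_cons_of_mem _ h'))
          · exact Or.inr h
        · intro y hy
          rcases i8 y hy with h | h
          · rcases c4 y h with h' | h'
            · exact Or.inl h'
            · exact Or.inr ⟨x, List.mem_cons_self .., h'⟩
          · obtain ⟨x', hx', hn⟩ := h
            exact Or.inr ⟨x', List.mem_cons_of_mem _ hx', hn⟩

lemma pv_whileA_nil (d : PySem.Dict String (List String)) :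
    ∀ (n : Nat) (vis conn : List String), pvWhileA d n vis conn [] = (vis, conn) := by
  intro n vis conn
  cases n <;> simp [pvWhileA]

lemma pv_whileB_nil (d : PySem.Dict String (List String)) :
    ∀ (n : Nat) (vis order seen : List String), pvQueue d n vis order [] seen = (vis, order) := by
  intro n vis order seen
  cases n <;> simp [pvQueue]

lemma pv_main_sim (d : PySem.Dict String (List String)) :
    ∀ (fA fB : Nat) (vis conn todo seen : List String),
      todo.Nodup → vis.Nodup → conn.Nodup →
      (∀ y ∈ conn, y ∈ vis) →
      (∀ x ∈ todo, x ∉ conn → x ∉ vis) →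
      (∀ x ∈ todo, x ∈ conn → ∀ y ∈ pvNbr d x, y ∈ vis ∨ y ∈ todo) →
      (∀ y, y ∈ seen ↔ y ∈ conn ∨ y ∈ todo) →
      (∀ y ∈ conn, y ∈ pvW d) → (∀ y ∈ todo, y ∈ pvW d) →
      ((pvW d).length + 2 ≤ fA + conn.length) →
      ((pvW d).length + 1 ≤ fB + conn.length) →
      (pvWhileA d fA vis conn todo
          = pvQueue d fB vis conn (todo.filter (fun x => !decide (x ∈ conn))) seen
       ∧ (pvWhileA d fA vis conn todo).1.Nodup
       ∧ (pvWhileA d fA vis conn todo).2.Nodup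
       ∧ (∀ y ∈ (pvWhileA d fA vis conn todo).1, y ∈ vis ∨ y ∈ pvW d)
       ∧ (∀ y ∈ vis, y ∈ (pvWhileA d fA vis conn todo).1)) := by
  intro fA
  induction fA with
  | zero =>
      intro fB vis conn todo seen _ _ hcnd _ _ _ _ hcW _ hfa _
      exact absurd hfa (by
        have := pv_len_le_W d conn hcnd hcW
        omega)
  | succ fA ih =>
      intro fB vis conn todo seen hnd hvnd hcnd hcv hF3 hI4 hseen hcW htW hfa hfb
      have hconnlen := pv_len_le_W d conn hcnd hcW
      rcases htodo : todo with _ | ⟨t, ts⟩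
      · subst htodo
        rw [pv_whileA_nil, List.filter_nil, pv_whileB_nil]
        exact ⟨rfl, hvnd, hcnd, fun y hy => Or.inl hy, fun y hy => hy⟩
      · rw [← htodo]
        have htne : todo ≠ [] := by simp [htodo]
        have hstepA : pvWhileA d (fA + 1) vis conn todo
            = pvWhileA d fA (todo.foldl (pvLayerStepA d) (vis, conn, [])).1
                (todo.foldl (pvLayerStepA d) (vis, conn, [])).2.1
                (todo.foldl (pvLayerStepA d) (vis, conn, [])).2.2 := by
          simp only [pvWhileA]
          rw [if_neg (by simp [htodo])]
          rfl
        by_cases hF : todo.filter (fun x => !decide (x ∈ conn)) = []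
        · -- all of todo is already connected: the layer is a no-op and next todo is empty
          have hallc : ∀ x ∈ todo, x ∈ conn := by
            intro x hx
            by_contra hxc
            have : x ∈ todo.filter (fun x => !decide (x ∈ conn)) :=
              List.mem_filter.2 ⟨hx, by simp [hxc]⟩
            rw [hF] at this
            exact absurd this (List.not_mem_nil)
          have hstale : todo.foldl (pvLayerStepA d) (vis, conn, ([] : List String))
              = (vis, conn, []) := by
            apply pv_foldA_stale d todo vis conn [] hallc hcv
            intro x hx y hy
            rcases hI4 x hx (hallc x hx) y hy with h | h
            · exact h
            · exact hcv y (hallc y h)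
          rw [hstepA, hstale]
          rw [pv_whileA_nil, hF, pv_whileB_nil]
          exact ⟨rfl, hvnd, hcnd, fun y hy => Or.inl hy, fun y hy => hy⟩
        · -- a genuine new layer
          obtain ⟨e1, e2, e3, e4, e5, e6, e7, e8⟩ := pv_layerA_sim d todo vis conn [] seen
            hnd List.nodup_nil hcv hF3
            (fun x hx hxc y hy => ((hI4 x hx hxc y hy).imp id (fun h => Or.inl h)))
            (by intro x hx; exact absurd hx (List.not_mem_nil))
            (fun y => by rw [hseen y]; simp)
            (by intro y hy; exact absurd hy (List.not_mem_nil))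
          set F := todo.filter (fun x => !decide (x ∈ conn)) with hFdef
          set st := todo.foldl (pvLayerStepA d) (vis, conn, ([] : List String)) with hst
          set dd := pvDisc d vis F seen with hdd
          have hFnd : F.Nodup := List.Nodup.filter _ hnd
          have hFsubT : ∀ y ∈ F, y ∈ todo := fun y hy => (List.mem_filter.1 hy).1
          have hFnotC : ∀ y ∈ F, y ∉ conn := fun y hy => by
            have := (List.mem_filter.1 hy).2
            simp at this
            exact this
          have hFnotV : ∀ y ∈ F, y ∉ vis := fun y hy =>
            hF3 y (hFsubT y hy) (hFnotC y hy)
          have hcFnd : (conn ++ F).Nodup := by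
            rw [List.nodup_append]
            refine ⟨hcnd, hFnd, ?_⟩
            intro a ha b hb
            intro h
            exact hFnotC b hb (h ▸ ha)
          have hcFW : ∀ y ∈ conn ++ F, y ∈ pvW d := by
            intro y hy
            rcases List.mem_append.1 hy with h | h
            · exact hcW y h
            · exact htW y (hFsubT y h)
          have hcFlen := pv_len_le_W d (conn ++ F) hcFnd hcFW
          rw [List.length_append] at hcFlen
          have hFpos : 1 ≤ F.length := by
            rcases hFe : F with _ | ⟨f, fs⟩
            · exact absurd hFe hF
            · simp [hFe]
          have hFlefB : F.length ≤ fB := by omega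
          -- predicate bridge: "new this layer" = "not in conn ++ F"
          have hPbr : pvP conn todo = fun y => !decide (y ∈ conn ++ F) := by
            funext y
            simp only [pvP, List.mem_append]
            by_cases hyc : y ∈ conn
            · simp [hyc]
            · by_cases hyt : y ∈ todo
              · have : y ∈ F := List.mem_filter.2 ⟨hyt, by simp [hyc]⟩
                simp [hyc, hyt, this]
              · have : y ∉ F := fun h => hyt (hFsubT y h)
                simp [hyc, hyt, this]
          have hunion : ∀ y : String, (y ∈ conn ∨ y ∈ todo) ↔ y ∈ conn ++ F := by
            intro y
            rw [List.mem_append]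
            constructor
            · intro h
              rcases h with h | h
              · exact Or.inl h
              · by_cases hyc : y ∈ conn
                · exact Or.inl hyc
                · exact Or.inr (List.mem_filter.2 ⟨h, by simp [hyc]⟩)
            · intro h
              rcases h with h | h
              · exact Or.inl h
              · exact Or.inr (hFsubT y h)
          -- run B through the whole layer
          have hBrun : pvQueue d fB vis conn F seen
              = pvQueue d (fB - F.length) (vis ++ F) (conn ++ F) dd.1 dd.2 := by
            have : fB = F.length + (fB - F.length) := by omega
            rw [this]
            have := pv_runB_layer d F (fB - F.length) vis conn [] seen hFnd hFnotV
              (fun y hy => (hseen y).2 (Or.inr (hFsubT y hy)))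
            simpa using this
          -- IH on the next layer
          have hACCf : st.2.2.filter (fun y => !decide (y ∈ conn ++ F)) = dd.1 := by
            rw [← hPbr]
            rw [e3]
            simp
          obtain ⟨j1, j2, j3, j4, j5⟩ := ih (fB - F.length) (vis ++ F) (conn ++ F)
            st.2.2 dd.2 e5
            (by
              rw [List.nodup_append]
              exact ⟨hvnd, hFnd, fun a ha b hb h => hFnotV b hb (h ▸ ha)⟩)
            hcFnd
            (fun y hy => by
              rcases List.mem_append.1 hy with h | h
              · exact List.mem_append_left _ (hcv y h)
              · exact List.mem_append_right _ h)
            (fun x hx hxc hxv => hxc (e6 x hx hxv))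
            (fun x hx hxc y hy => e7 x hx hxc y hy)
            (fun y => by
              rw [e4 y]
              constructor
              · intro h
                rcases h with h | h | h
                · exact Or.inl ((hunion y).1 (Or.inl h))
                · exact Or.inl ((hunion y).1 (Or.inr h))
                · exact Or.inr h
              · intro h
                rcases h with h | h
                · rcases (hunion y).2 h with h' | h'
                  · exact Or.inl h'
                  · exact Or.inr (Or.inl h')
                · exact Or.inr (Or.inr h))
            hcFW
            (fun y hy => by
              rcases e8 y hy with h | h
              · exact absurd h (List.not_mem_nil)
              · obtain ⟨x, _, hn⟩ := h
                exact pv_nbr_sub_W d x y hn)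
            (by rw [List.length_append]; omega)
            (by rw [List.length_append]; omega)
          rw [hstepA]
          rw [show (todo.foldl (pvLayerStepA d) (vis, conn, ([] : List String))).1 = st.1 from rfl,
              show (todo.foldl (pvLayerStepA d) (vis, conn, ([] : List String))).2.1 = st.2.1 from rfl,
              show (todo.foldl (pvLayerStepA d) (vis, conn, ([] : List String))).2.2 = st.2.2 from rfl]
          rw [e1, e2]
          refine ⟨?_, j2, j3, ?_, ?_⟩
          · rw [j1, hACCf, hBrun]
          · intro y hy
            rcases j4 y hy with h | h
            · rcases List.mem_append.1 h with h' | h'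
              · exact Or.inl h'
              · exact Or.inr (htW y (hFsubT y h'))
            · exact Or.inr h
          · intro y hy
            exact j5 y (List.mem_append_left _ hy)

-- ---------- directed reachability (avoiding the already-visited set) ----------

inductive PvReach (d : PySem.Dict String (List String)) (vis0 : List String) (w : String) : String → Prop
  | base : PvReach d vis0 w w
  | step {x y : String} : PvReach d vis0 w x → y ∈ pvNbr d x → y ∉ vis0 → PvReach d vis0 w y

lemma pv_reach_congr (d : PySem.Dict String (List String)) (v v' : List String) (w x : String)
    (h : ∀ z : String, z ∈ v ↔ z ∈ v') (hr : PvReach d v w x) : PvReach d v' w x := by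
  induction hr with
  | base => exact PvReach.base
  | step _ hn hv ih => exact PvReach.step ih hn (fun hz => hv ((h _).2 hz))

lemma pv_reach_in (d : PySem.Dict String (List String)) (V0 : List String) (w : String)
    (S : List String) (hw : w ∈ S)
    (hcl : ∀ x ∈ S, ∀ y ∈ pvNbr d x, y ∈ V0 ∨ y ∈ S) :
    ∀ x, PvReach d V0 w x → x ∈ S := by
  intro x hx
  induction hx with
  | base => exact hw
  | step _ hn hv ih =>
      rcases hcl _ ih _ hn with h | h
      · exact absurd h hv
      · exact h

-- coverage of the queue's inner fold: every neighbour lands in visited or in seen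
lemma pv_foldB_cover (vis : List String) (l : List String) :
    ∀ (q s : List String), ∀ y ∈ l, y ∈ vis ∨ y ∈ (l.foldl (pvStepB vis) (q, s)).2 := by
  induction l with
  | nil => intro q s y hy; exact absurd hy (List.not_mem_nil)
  | cons z zs ih =>
      intro q s y hy
      rw [List.foldl_cons]
      rcases List.mem_cons.1 hy with rfl | hy'
      · by_cases hv : y ∈ vis
        · exact Or.inl hv
        · right
          by_cases hs : y ∈ s
          · have hc : (PySem.Set.contains vis y || PySem.Set.contains s y) = true := by
              simp [pv_contains_eq, hs]
            simp only [pvStepB, hc, if_true]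
            exact pv_foldB_seen_mono vis zs q s y hs
          · have hc : (PySem.Set.contains vis y || PySem.Set.contains s y) = false := by
              simp [pv_contains_eq, hv, hs]
            simp only [pvStepB, hc, Bool.false_eq_true, if_false]
            exact pv_foldB_seen_mono vis zs (q ++ [y]) (PySem.Set.add s y) y
              (by rw [PySem.Set.add_of_not_mem hs]; simp)
      · by_cases hc : (PySem.Set.contains vis z || PySem.Set.contains s z) = true
        · simp only [pvStepB, hc, if_true]
          exact ih q s y hy'
        · simp only [pvStepB, hc, Bool.false_eq_true, if_false]
          exact ih (q ++ [z]) (PySem.Set.add s z) y hy'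

-- ---------- the queue loop computes exactly the reachable set ----------

lemma pv_queue_reach (d : PySem.Dict String (List String)) (V0 : List String) (w : String) :
    ∀ (fuel : Nat) (vis order pending seen : List String),
      (∀ y, y ∈ vis ↔ y ∈ V0 ∨ y ∈ order) → vis.Nodup →
      (order ++ pending).Nodup →
      (∀ y, y ∈ seen ↔ y ∈ order ∨ y ∈ pending) →
      (∀ x, x ∈ order ∨ x ∈ pending → PvReach d V0 w x ∧ x ∈ pvW d) →
      (∀ x ∈ order, ∀ y ∈ pvNbr d x, y ∈ V0 ∨ y ∈ order ∨ y ∈ pending) →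
      ((pvW d).length + 1 ≤ fuel + order.length) →
      (∀ x, x ∈ order ∨ x ∈ pending → x ∈ (pvQueue d fuel vis order pending seen).2) ∧
      (∀ x ∈ (pvQueue d fuel vis order pending seen).2, PvReach d V0 w x ∧ x ∈ pvW d) ∧
      (∀ x ∈ (pvQueue d fuel vis order pending seen).2, ∀ y ∈ pvNbr d x,
          y ∈ V0 ∨ y ∈ (pvQueue d fuel vis order pending seen).2) ∧
      (pvQueue d fuel vis order pending seen).2.Nodup ∧
      (∀ y, y ∈ (pvQueue d fuel vis order pending seen).1 ↔
          y ∈ V0 ∨ y ∈ (pvQueue d fuel vis order pending seen).2) ∧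
      (pvQueue d fuel vis order pending seen).1.Nodup := by
  intro fuel
  induction fuel with
  | zero =>
      intro vis order pending seen _ _ hnd _ hx _ hfuel
      exact absurd hfuel (by
        have hond : order.Nodup := (List.nodup_append.1 hnd).1
        have := pv_len_le_W d order hond (fun y hy => (hx y (Or.inl hy)).2)
        omega)
  | succ fuel ih =>
      intro vis order pending seen hM hvnd hnd hseen hx hO hfuel
      rcases pending with _ | ⟨curr, rest⟩
      · rw [pv_whileB_nil]
        refine ⟨?_, ?_, ?_, ?_, hM, hvnd⟩
        · intro x hxx
          rcases hxx with h | h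
          · exact h
          · exact absurd h (List.not_mem_nil)
        · exact fun x hxx => hx x (Or.inl hxx)
        · intro x hxx y hy
          rcases hO x hxx y hy with h | h | h
          · exact Or.inl h
          · exact Or.inr h
          · exact absurd h (List.not_mem_nil)
        · simpa using hnd
      · -- one step of the queue
        have hcurr : PvReach d V0 w curr ∧ curr ∈ pvW d :=
          hx curr (Or.inr (List.mem_cons_self ..))
        have hndoc : (order ++ [curr] ++ rest).Nodup := by
          rw [← List.append_cons]; exact hnd
        have hcurrO : curr ∉ order := by
          have := (List.nodup_append.1 hnd).2.2
          intro h; exact this curr h curr (List.mem_cons_self ..) rfl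
        have hstep : pvQueue d (fuel+1) vis order (curr :: rest) seen =
            pvQueue d fuel (PySem.Set.add vis curr) (order ++ [curr])
              ((d.getD curr []).foldl (pvStepB (PySem.Set.add vis curr)) (rest, seen)).1
              ((d.getD curr []).foldl (pvStepB (PySem.Set.add vis curr)) (rest, seen)).2 := rfl
        rw [hstep]
        set vis' := PySem.Set.add vis curr with hvis'
        have hgetD : d.getD curr [] = pvNbr d curr := by
          rw [PySem.Dict.getD_eq_get?_getD]; rfl
        rw [hgetD, pv_foldB_prefix]
        set p := (pvNbr d curr).foldl (pvStepB vis') ([], seen) with hp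
        obtain ⟨pm, pnd, ppr⟩ := pv_foldB_char vis' (pvNbr d curr) seen
        rw [← hp] at pm pnd ppr
        have hM' : ∀ y, y ∈ vis' ↔ y ∈ V0 ∨ y ∈ order ++ [curr] := by
          intro y
          rw [hvis', PySem.Set.mem_add, hM y]
          simp [List.mem_append, or_assoc]
        have hV0vis' : ∀ y ∈ V0, y ∈ vis' := fun y hy => (hM' y).2 (Or.inl hy)
        have hnewProp : ∀ y ∈ p.1, y ∉ V0 ∧ y ∉ seen ∧ y ∈ pvNbr d curr := by
          intro y hy
          obtain ⟨a, b, c⟩ := ppr y hy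
          exact ⟨fun hv => a (hV0vis' y hv), b, c⟩
        have hvnd' : vis'.Nodup := PySem.Set.nodup_add vis curr hvnd
        have hnd' : ((order ++ [curr]) ++ (rest ++ p.1)).Nodup := by
          rw [List.nodup_append]
          refine ⟨(List.nodup_append.1 hndoc).1, ?_, ?_⟩
          · rw [List.nodup_append]
            refine ⟨((List.nodup_append.1 hndoc).2.1), pnd, ?_⟩
            intro a ha b hb hab
            exact (hnewProp b hb).2.1 ((hseen b).2 (Or.inr (List.mem_cons_of_mem _ (hab ▸ ha))))
          · intro a ha b hb hab
            rcases List.mem_append.1 hb with hb' | hb'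
            · exact (List.nodup_append.1 hndoc).2.2 a ha b hb' hab
            · apply (hnewProp b hb').2.1
              apply (hseen b).2
              rcases List.mem_append.1 ha with h | h
              · exact Or.inl (hab ▸ h)
              · rw [List.mem_singleton] at h
                exact Or.inr (h ▸ hab ▸ List.mem_cons_self ..)
        have hseen' : ∀ y, y ∈ p.2 ↔ y ∈ order ++ [curr] ∨ y ∈ rest ++ p.1 := by
          intro y
          rw [pm y, hseen y]
          simp only [List.mem_append, List.mem_singleton, List.mem_cons]
          tauto
        have hx' : ∀ x, x ∈ order ++ [curr] ∨ x ∈ rest ++ p.1 →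
            PvReach d V0 w x ∧ x ∈ pvW d := by
          intro x hxx
          rcases hxx with h | h
          · rcases List.mem_append.1 h with h' | h'
            · exact hx x (Or.inl h')
            · rw [List.mem_singleton] at h'
              exact h' ▸ hcurr
          · rcases List.mem_append.1 h with h' | h'
            · exact hx x (Or.inr (List.mem_cons_of_mem _ h'))
            · obtain ⟨a, _, c⟩ := hnewProp x h'
              exact ⟨PvReach.step hcurr.1 c a, pv_nbr_sub_W d curr x c⟩
        have hO' : ∀ x ∈ order ++ [curr], ∀ y ∈ pvNbr d x,
            y ∈ V0 ∨ y ∈ order ++ [curr] ∨ y ∈ rest ++ p.1 := by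
          intro x hxx y hy
          rcases List.mem_append.1 hxx with h | h
          · rcases hO x h y hy with h' | h' | h'
            · exact Or.inl h'
            · exact Or.inr (Or.inl (List.mem_append_left _ h'))
            · rcases List.mem_cons.1 h' with rfl | h''
              · exact Or.inr (Or.inl (List.mem_append_right _ (List.mem_singleton.2 rfl)))
              · exact Or.inr (Or.inr (List.mem_append_left _ h''))
          · rw [List.mem_singleton] at h
            subst h
            have := pv_foldB_cover vis' (pvNbr d x) rest seen y hy
            rw [pv_foldB_prefix, ← hp] at this
            rcases this with h' | h'
            · rcases (hM' y).1 h' with h'' | h''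
              · exact Or.inl h''
              · exact Or.inr (Or.inl h'')
            · rcases (hseen' y).1 h' with h'' | h''
              · exact Or.inr (Or.inl h'')
              · exact Or.inr (Or.inr h'')
        have hfuel' : (pvW d).length + 1 ≤ fuel + (order ++ [curr]).length := by
          rw [List.length_append, List.length_singleton]; omega
        obtain ⟨o1, o2, o3, o4, o5, o6⟩ :=
          ih vis' (order ++ [curr]) (rest ++ p.1) p.2 hM' hvnd' hnd' hseen' hx' hO' hfuel'
        refine ⟨?_, o2, o3, o4, o5, o6⟩
        intro x hxx
        apply o1
        rcases hxx with h | h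
        · exact Or.inl (List.mem_append_left _ h)
        · rcases List.mem_cons.1 h with rfl | h'
          · exact Or.inl (List.mem_append_right _ (List.mem_singleton.2 rfl))
          · exact Or.inr (List.mem_append_left _ h')

-- ---------- fuel sufficiency for the DFS loop ----------

def pvDegSum (d : PySem.Dict String (List String)) (vis : List String) : Nat :=
  (((pvW d).filter (fun x => !decide (x ∈ vis))).map (fun x => (pvNbr d x).length)).sum

lemma pv_W_nodup (d : PySem.Dict String (List String)) : (pvW d).Nodup :=
  PySem.Set.nodup_ofList _

lemma pv_degSum_add (d : PySem.Dict String (List String)) (vis : List String) (x : String)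
    (hx : x ∈ pvW d) (hxv : x ∉ vis) :
    pvDegSum d (vis ++ [x]) + (pvNbr d x).length = pvDegSum d vis := by
  unfold pvDegSum
  set L := (pvW d).filter (fun y => !decide (y ∈ vis)) with hL
  have hfil : (pvW d).filter (fun y => !decide (y ∈ vis ++ [x]))
      = L.filter (fun y => !decide (y = x)) := by
    rw [hL, List.filter_filter]
    apply List.filter_congr
    intro y _
    by_cases h1 : y ∈ vis
    · simp [List.mem_append, h1]
    · by_cases h2 : y = x <;> simp [List.mem_append, h1, h2]
  have hxL : x ∈ L := List.mem_filter.2 ⟨hx, by simp [hxv]⟩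
  have hLnd : L.Nodup := (pv_W_nodup d).filter _
  have herase : L.erase x = L.filter (fun y => !decide (y = x)) := by
    rw [List.Nodup.erase_eq_filter hLnd]
    apply List.filter_congr
    intro y _
    by_cases h : y = x <;> simp [h]
  have hperm : List.Perm L (x :: L.erase x) := List.perm_cons_erase hxL
  have hsum : (L.map (fun z => (pvNbr d z).length)).sum
      = (pvNbr d x).length + ((L.erase x).map (fun z => (pvNbr d z).length)).sum := by
    have := (hperm.map (fun z => (pvNbr d z).length)).sum_eq
    simpa using this
  rw [hfil, ← herase]
  omega

lemma pv_len_mem_flat (L : List (List String)) (l : List String) (hl : l ∈ L) :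
    l.length ≤ (L.flatMap (fun v => v)).length := by
  induction L with
  | nil => exact absurd hl (List.not_mem_nil)
  | cons a as ih =>
      rcases List.mem_cons.1 hl with rfl | h
      · simp
      · have := ih h
        simp only [List.flatMap_cons, List.length_append]
        omega

lemma pv_deg_le (d : PySem.Dict String (List String)) (x : String) :
    (pvNbr d x).length ≤ (d.values.flatMap (fun v => v)).length := by
  unfold pvNbr
  cases hg : d.get? x with
  | none => simp
  | some v =>
      have hv : v ∈ d.values := by
        have h2 := PySem.Dict.mem_items_of_get?_eq_some (d := d) hg
        have : v = (x, v).2 := rfl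
        rw [this]; exact List.mem_map_of_mem h2
      simpa using pv_len_mem_flat d.values v hv

lemma pv_degSum_le (d : PySem.Dict String (List String)) (vis : List String) :
    pvDegSum d vis ≤ (pvW d).length * (d.values.flatMap (fun v => v)).length := by
  unfold pvDegSum
  set L := (pvW d).filter (fun y => !decide (y ∈ vis)) with hL
  have h1 : (L.map (fun z => (pvNbr d z).length)).sum
      ≤ (L.map (fun z => (pvNbr d z).length)).length * (d.values.flatMap (fun v => v)).length := by
    apply List.sum_le_card_nsmul
    intro a ha
    obtain ⟨z, _, rfl⟩ := List.mem_map.1 ha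
    exact pv_deg_le d z
  have h2 : (L.map (fun z => (pvNbr d z).length)).length ≤ (pvW d).length := by
    rw [List.length_map, hL]
    exact List.length_filter_le _ _
  calc (L.map (fun z => (pvNbr d z).length)).sum
      ≤ _ := h1
    _ ≤ (pvW d).length * (d.values.flatMap (fun v => v)).length :=
        Nat.mul_le_mul_right _ h2

-- ---------- the DFS stack loop computes exactly the reachable set ----------

lemma pv_whileD_cons (d : PySem.Dict String (List String)) (fuel : Nat)
    (vis conn rest : List String) (node : String) :
    pvWhileD d (fuel+1) vis conn (node :: rest) =
      if PySem.Set.contains vis node then pvWhileD d fuel vis conn rest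
      else pvWhileD d fuel (PySem.Set.add vis node) (PySem.Set.add conn node)
        ((d.getD node []).reverse ++ rest) := rfl

lemma pv_dfs_reach (d : PySem.Dict String (List String)) (V0 : List String) (w : String) :
    ∀ (fuel : Nat) (vis conn stack : List String),
      (∀ y, y ∈ vis ↔ y ∈ V0 ∨ y ∈ conn) → vis.Nodup → conn.Nodup →
      (∀ x ∈ stack, (x ∉ V0 → PvReach d V0 w x) ∧ x ∈ pvW d) →
      (∀ x ∈ conn, PvReach d V0 w x ∧ x ∈ pvW d) →
      (∀ x ∈ conn, ∀ y ∈ pvNbr d x, y ∈ V0 ∨ y ∈ conn ∨ y ∈ stack) →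
      (stack.length + pvDegSum d vis < fuel) →
      (∀ x ∈ conn, x ∈ (pvWhileD d fuel vis conn stack).2) ∧
      (∀ x ∈ (pvWhileD d fuel vis conn stack).2, PvReach d V0 w x ∧ x ∈ pvW d) ∧
      (∀ x ∈ (pvWhileD d fuel vis conn stack).2, ∀ y ∈ pvNbr d x,
          y ∈ V0 ∨ y ∈ (pvWhileD d fuel vis conn stack).2) ∧
      (pvWhileD d fuel vis conn stack).2.Nodup ∧
      (∀ y, y ∈ (pvWhileD d fuel vis conn stack).1 ↔
          y ∈ V0 ∨ y ∈ (pvWhileD d fuel vis conn stack).2) ∧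
      (pvWhileD d fuel vis conn stack).1.Nodup ∧
      (∀ x ∈ stack, x ∈ (pvWhileD d fuel vis conn stack).1) ∧
      (∀ y ∈ vis, y ∈ (pvWhileD d fuel vis conn stack).1) := by
  intro fuel
  induction fuel with
  | zero => intro vis conn stack _ _ _ _ _ _ hfuel; omega
  | succ fuel ih =>
      intro vis conn stack hM hvnd hcnd hst hcn hcl hfuel
      rcases stack with _ | ⟨node, rest⟩
      · have hr : pvWhileD d (fuel+1) vis conn [] = (vis, conn) := by
          simp [pvWhileD]
        rw [hr]
        refine ⟨fun x hx => hx, hcn, ?_, hcnd, hM, hvnd, ?_, fun y hy => hy⟩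
        · intro x hx y hy
          rcases hcl x hx y hy with h | h | h
          · exact Or.inl h
          · exact Or.inr h
          · exact absurd h (List.not_mem_nil)
        · intro x hx; exact absurd hx (List.not_mem_nil)
      · by_cases hv : node ∈ vis
        · have hc : PySem.Set.contains vis node = true := by
            rw [pv_contains_eq]; simp [hv]
          have hr : pvWhileD d (fuel+1) vis conn (node :: rest) =
              pvWhileD d fuel vis conn rest := by
            rw [pv_whileD_cons, hc]
            simp
          rw [hr]
          have hcl' : ∀ x ∈ conn, ∀ y ∈ pvNbr d x, y ∈ V0 ∨ y ∈ conn ∨ y ∈ rest := by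
            intro x hx y hy
            rcases hcl x hx y hy with h | h | h
            · exact Or.inl h
            · exact Or.inr (Or.inl h)
            · rcases List.mem_cons.1 h with rfl | h'
              · rcases (hM y).1 hv with h'' | h''
                · exact Or.inl h''
                · exact Or.inr (Or.inl h'')
              · exact Or.inr (Or.inr h')
          obtain ⟨o1, o2, o3, o4, o5, o6, o7, o8⟩ := ih vis conn rest hM hvnd hcnd
            (fun x hx => hst x (List.mem_cons_of_mem _ hx)) hcn hcl'
            (by simp at hfuel ⊢; omega)
          refine ⟨o1, o2, o3, o4, o5, o6, ?_, o8⟩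
          intro x hx
          rcases List.mem_cons.1 hx with rfl | h'
          · exact o8 x hv
          · exact o7 x h'
        · have hc : PySem.Set.contains vis node = false := by
            rw [pv_contains_eq]; simp [hv]
          have hnV0 : node ∉ V0 := fun h => hv ((hM node).2 (Or.inl h))
          have hnC : node ∉ conn := fun h => hv ((hM node).2 (Or.inr h))
          have hreach : PvReach d V0 w node :=
            (hst node (List.mem_cons_self ..)).1 hnV0
          have hWn : node ∈ pvW d := (hst node (List.mem_cons_self ..)).2
          have hgetD : d.getD node [] = pvNbr d node := by
            rw [PySem.Dict.getD_eq_get?_getD]; rfl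
          have hr : pvWhileD d (fuel+1) vis conn (node :: rest) =
              pvWhileD d fuel (vis ++ [node]) (conn ++ [node])
                ((pvNbr d node).reverse ++ rest) := by
            rw [pv_whileD_cons, hc]
            simp only [Bool.false_eq_true, if_false]
            rw [PySem.Set.add_of_not_mem hv, PySem.Set.add_of_not_mem hnC, hgetD]
          rw [hr]
          have hM' : ∀ y, y ∈ vis ++ [node] ↔ y ∈ V0 ∨ y ∈ conn ++ [node] := by
            intro y
            simp only [List.mem_append, List.mem_singleton, hM y]
            tauto
          have hvnd' : (vis ++ [node]).Nodup := by
            rw [List.nodup_append]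
            exact ⟨hvnd, List.nodup_singleton _, by
              intro a ha b hb hab
              rw [List.mem_singleton] at hb
              subst hb
              subst hab
              exact hv ha⟩
          have hcnd' : (conn ++ [node]).Nodup := by
            rw [List.nodup_append]
            exact ⟨hcnd, List.nodup_singleton _, by
              intro a ha b hb hab
              rw [List.mem_singleton] at hb
              subst hb
              subst hab
              exact hnC ha⟩
          have hst' : ∀ x ∈ (pvNbr d node).reverse ++ rest,
              (x ∉ V0 → PvReach d V0 w x) ∧ x ∈ pvW d := by
            intro x hx
            rcases List.mem_append.1 hx with h | h
            · rw [List.mem_reverse] at h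
              exact ⟨fun hnv => PvReach.step hreach h hnv, pv_nbr_sub_W d node x h⟩
            · exact hst x (List.mem_cons_of_mem _ h)
          have hcn' : ∀ x ∈ conn ++ [node], PvReach d V0 w x ∧ x ∈ pvW d := by
            intro x hx
            rcases List.mem_append.1 hx with h | h
            · exact hcn x h
            · rw [List.mem_singleton] at h
              exact h ▸ ⟨hreach, hWn⟩
          have hcl' : ∀ x ∈ conn ++ [node], ∀ y ∈ pvNbr d x,
              y ∈ V0 ∨ y ∈ conn ++ [node] ∨ y ∈ (pvNbr d node).reverse ++ rest := by
            intro x hx y hy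
            rcases List.mem_append.1 hx with h | h
            · rcases hcl x h y hy with h' | h' | h'
              · exact Or.inl h'
              · exact Or.inr (Or.inl (List.mem_append_left _ h'))
              · rcases List.mem_cons.1 h' with rfl | h''
                · exact Or.inr (Or.inl (List.mem_append_right _ (List.mem_singleton.2 rfl)))
                · exact Or.inr (Or.inr (List.mem_append_right _ h''))
            · rw [List.mem_singleton] at h
              subst h
              exact Or.inr (Or.inr (List.mem_append_left _ (List.mem_reverse.2 hy)))
          have hfuel' : ((pvNbr d node).reverse ++ rest).length
              + pvDegSum d (vis ++ [node]) < fuel := by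
            have hds := pv_degSum_add d vis node hWn hv
            simp only [List.length_append, List.length_reverse, List.length_cons] at hfuel ⊢
            omega
          obtain ⟨o1, o2, o3, o4, o5, o6, o7, o8⟩ := ih (vis ++ [node]) (conn ++ [node])
            ((pvNbr d node).reverse ++ rest) hM' hvnd' hcnd' hst' hcn' hcl' hfuel'
          refine ⟨?_, o2, o3, o4, o5, o6, ?_, ?_⟩
          · exact fun x hx => o1 x (List.mem_append_left _ hx)
          · intro x hx
            rcases List.mem_cons.1 hx with rfl | h'
            · exact o8 x (List.mem_append_right _ (List.mem_singleton.2 rfl))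
            · exact o7 x (List.mem_append_right _ h')
          · exact fun y hy => o8 y (List.mem_append_left _ hy)

-- ---------- sorted glue ----------

lemma pv_sorted_eq (l₁ l₂ : List String) (h1 : l₁.Nodup) (h2 : l₂.Nodup)
    (hm : ∀ y : String, y ∈ l₁ ↔ y ∈ l₂) :
    PySem.List.sorted l₁ (fun x => x) false = PySem.List.sorted l₂ (fun x => x) false := by
  apply PySem.List.sorted_eq_sorted_of_perm
  · exact fun a b h => h
  · exact (List.perm_ext_iff_of_nodup h1 h2).2 hm

-- ---------- outer loop simulation ----------

lemma pv_outer_sim (d : PySem.Dict String (List String)) :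
    ∀ (ks : List String) (res : PySem.Dict String (List String)) (visA visB : List String),
      visA.Nodup → visB.Nodup → (∀ y : String, y ∈ visA ↔ y ∈ visB) →
      (∀ w ∈ ks, w ∈ pvW d) →
      (ks.foldl (fun (st : PySem.Dict String (List String) × List String) word =>
          if PySem.Set.contains st.2 word then st
          else
            let r := pvWhileA d (pvFuel d) st.2 PySem.Set.empty (PySem.Set.add PySem.Set.empty word)
            let s := PySem.List.sorted r.2 (fun x => x) false
            (s.foldl (fun res cw => res.insert cw s) st.1, r.1)) (res, visA)).1
      = (ks.foldl (fun (st : PySem.Dict String (List String) × List String) word =>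
          if PySem.Set.contains st.2 word then st
          else
            let r := pvWhileD d (pvFuelB d) st.2 PySem.Set.empty [word]
            let s := PySem.List.sorted r.2 (fun x => x) false
            (s.foldl (fun res cw => res.insert cw s) st.1, r.1)) (res, visB)).1 := by
  intro ks
  induction ks with
  | nil => intro res visA visB _ _ _ _; rfl
  | cons w ws ih =>
      intro res visA visB hA hB hAB hks
      have hWw : w ∈ pvW d := hks w (List.mem_cons_self ..)
      by_cases hw : w ∈ visA
      · have hcA : PySem.Set.contains visA w = true := by rw [pv_contains_eq]; simp [hw]
        have hcB : PySem.Set.contains visB w = true := by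
          rw [pv_contains_eq]; simp [(hAB w).1 hw]
        simp only [List.foldl_cons, hcA, hcB, if_true]
        exact ih res visA visB hA hB hAB (fun y hy => hks y (List.mem_cons_of_mem _ hy))
      · have hwB : w ∉ visB := fun h => hw ((hAB w).2 h)
        have hcA : PySem.Set.contains visA w = false := by rw [pv_contains_eq]; simp [hw]
        have hcB : PySem.Set.contains visB w = false := by rw [pv_contains_eq]; simp [hwB]
        have haddw : PySem.Set.add ([] : List String) w = [w] := by
          simp [PySem.Set.add_eq_ite]
        -- A's component via the literal queue simulation, then its reach characterization
        obtain ⟨j1, _, _, _, _⟩ := pv_main_sim d (pvFuel d) (pvFuel d) visA [] [w] [w]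
          (List.nodup_singleton w) hA List.nodup_nil
          (by intro y hy; exact absurd hy (List.not_mem_nil))
          (fun x hx _ => by rw [List.mem_singleton] at hx; exact hx ▸ hw)
          (fun x _ hx => absurd hx (List.not_mem_nil))
          (fun y => by simp)
          (by intro y hy; exact absurd hy (List.not_mem_nil))
          (fun y hy => by rw [List.mem_singleton] at hy; exact hy ▸ hWw)
          (by have := pv_fuel_ge d; omega)
          (by have := pv_fuel_ge d; omega)
        have hfilter : ([w].filter (fun x => !decide (x ∈ ([] : List String)))) = [w] := by simp
        rw [hfilter] at j1
        obtain ⟨q1, q2, q3, q4, q5, q6⟩ := pv_queue_reach d visA w (pvFuel d) visA [] [w] [w]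
          (fun y => by simp) hA (by simp) (fun y => by simp)
          (fun x hx => by
            rcases hx with h | h
            · exact absurd h (List.not_mem_nil)
            · rw [List.mem_singleton] at h
              subst h
              exact ⟨PvReach.base, hWw⟩)
          (by intro x hx; exact absurd hx (List.not_mem_nil))
          (by have := pv_fuel_ge d; omega)
        obtain ⟨e1, e2, e3, e4, e5, e6, e7, e8⟩ := pv_dfs_reach d visB w (pvFuelB d) visB [] [w]
          (fun y => by simp) hB List.nodup_nil
          (fun x hx => by
            rw [List.mem_singleton] at hx
            subst hx
            exact ⟨fun _ => PvReach.base, hWw⟩)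
          (by intro x hx; exact absurd hx (List.not_mem_nil))
          (by intro x hx; exact absurd hx (List.not_mem_nil))
          (by
            have h1 := pv_degSum_le d visB
            have : (1 : Nat) ≤ (pvW d).length := by
              have : w ∈ pvW d := hWw
              cases hWl : pvW d with
              | nil => rw [hWl] at this; exact absurd this (List.not_mem_nil)
              | cons a as => simp [hWl]
            unfold pvFuelB
            simp only [List.length_cons, List.length_nil]
            omega)
        set rA := pvWhileA d (pvFuel d) visA [] [w] with hrA
        set rB := pvWhileD d (pvFuelB d) visB [] [w] with hrB
        set rQ := pvQueue d (pvFuel d) visA [] [w] [w] with hrQ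
        have hAQ : rA = rQ := j1
        -- both component lists carry exactly the words reachable from w
        have hwQ : w ∈ rQ.2 := q1 w (Or.inr (List.mem_cons_self ..))
        have hwB2 : w ∈ rB.2 := by
          have := e7 w (List.mem_cons_self ..)
          rcases (e5 w).1 this with h | h
          · exact absurd h hwB
          · exact h
        have hQiff : ∀ x, x ∈ rQ.2 ↔ PvReach d visA w x := by
          intro x
          constructor
          · exact fun hx => (q2 x hx).1
          · exact pv_reach_in d visA w rQ.2 hwQ q3 x
        have hBiff : ∀ x, x ∈ rB.2 ↔ PvReach d visB w x := by
          intro x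
          constructor
          · exact fun hx => (e2 x hx).1
          · exact pv_reach_in d visB w rB.2 hwB2 e3 x
        have hmem : ∀ y : String, y ∈ rQ.2 ↔ y ∈ rB.2 := by
          intro y
          rw [hQiff y, hBiff y]
          exact ⟨pv_reach_congr d visA visB w y hAB, pv_reach_congr d visB visA w y
            (fun z => (hAB z).symm)⟩
        have hsorted : PySem.List.sorted rA.2 (fun x => x) false
            = PySem.List.sorted rB.2 (fun x => x) false := by
          rw [hAQ]
          exact pv_sorted_eq rQ.2 rB.2 q4 e4 hmem
        have hvisIff : ∀ y : String, y ∈ rA.1 ↔ y ∈ rB.1 := by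
          intro y
          rw [hAQ, q5 y, e5 y]
          constructor
          · intro h
            rcases h with h | h
            · exact Or.inl ((hAB y).1 h)
            · exact Or.inr ((hmem y).1 h)
          · intro h
            rcases h with h | h
            · exact Or.inl ((hAB y).2 h)
            · exact Or.inr ((hmem y).2 h)
        have hvisAnd : rA.1.Nodup := by rw [hAQ]; exact q6
        -- take the step on both sides and recurse
        simp only [List.foldl_cons, hcA, hcB, Bool.false_eq_true, if_false]
        rw [show (PySem.Set.empty : List String) = ([] : List String) from rfl, haddw]
        rw [← hrA, ← hrB, hsorted]
        exact ih _ rA.1 rB.1 hvisAnd e6 hvisIff (fun y hy => hks y (List.mem_cons_of_mem _ hy))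

-- ===== VERDICT (by name: the statement is the Claim_ definition above) =====
theorem generateConnectedSynonyms_spec : Claim_equal_generateConnectedSynonyms := by
  intro similarWords _
  unfold Spec_generateConnectedSynonyms generateConnectedSynonyms generateConnectedSynonyms_alt
  have h := pv_outer_sim (PySem.Dict.ofList similarWords)
    (PySem.Dict.ofList similarWords).keys PySem.Dict.empty PySem.Set.empty PySem.Set.empty
    List.nodup_nil List.nodup_nil (fun y => Iff.rfl)
    (fun w hw => pv_keys_sub_W (PySem.Dict.ofList similarWords) w hw)
  exact congrArg PySem.Dict.items h
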